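-- pv_equiv track=rewrite | github.com/Jhryu30/CodingDiary | 프로그래머스/2/250136. ［PCCP 기출문제］ 2번 ／ 석유 시추/［PCCP 기출문제］ 2번 ／ 석유 시추.py | solution
-- ===== SOURCE A (Python) =====
-- from collections import deque
--
-- def solution(land):
--     answer = 0
--     n,m = len(land),len(land[0])
--     visited = [[0 for _ in range(m)] for _ in range(n)]
--
--     def bfs(graph,v,visted):
--         queue = deque()
--         queue.append(v)
--         x,y = v
--         min_y,max_y,cnt = y,y,1
--         visited[x][y] = 1
--
--         while queue:
--             x,y = queue.popleft()
--             for dx,dy in [(-1,0),(1,0),(0,-1),(0,1)]: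
--                 new_x, new_y = x+dx, y+dy
--                 if new_x<0 or new_y<0 or new_x>=n or new_y>=m:
--                     continue
--                 if not visited[new_x][new_y] and graph[new_x][new_y]:
--                     visited[new_x][new_y] = 1
--                     queue.append((new_x,new_y))
--                     min_y,max_y = min(new_y,min_y),max(new_y,max_y)
--                     cnt += 1
--
--         return min_y,max_y,cnt
--
--     oil = [0 for _ in range(m)]
--     for x in range(n):
--         for y in range(m):
--             if not visited[x][y] and land[x][y]:
--                 min_y,max_y,cnt = bfs(land,(x,y),visited)
--                 for oil_y in range(min_y,max_y+1):
--                     oil[oil_y] += cnt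
--
--     answer = max(oil)
--
--     return answer
-- ===== SOURCE B (Python) =====
-- def solution(land):
--     n, m = len(land), len(land[0])
--     N = n * m
--     # label propagation: each oily cell starts labelled with its own flat index,
--     # and repeatedly takes the minimum label among itself and oily neighbours.
--     lab = [x * m + y if land[x][y] else -1 for x in range(n) for y in range(m)]
--
--     def nbrs(i):
--         x, y = i // m, i % m
--         out = []
--         if x > 0: out.append(i - m)
--         if x + 1 < n: out.append(i + m)
--         if y > 0: out.append(i - 1)
--         if y + 1 < m: out.append(i + 1)
--         return out
--
--     for _ in range(N):
--         lab = [lab[i] if lab[i] < 0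
--                else min([lab[i]] + [lab[j] for j in nbrs(i) if lab[j] >= 0])
--                for i in range(N)]
--
--     # group cells by final label: count, min column, max column per component
--     agg = {}
--     for i in range(N):
--         L = lab[i]
--         if L < 0:
--             continue
--         y = i % m
--         if L in agg:
--             c, mn, mx = agg[L]
--             agg[L] = (c + 1, min(mn, y), max(mx, y))
--         else:
--             agg[L] = (1, y, y)
--
--     oil = [0] * m
--     for (c, mn, mx) in agg.values():
--         for col in range(mn, mx + 1):
--             oil[col] += c
--     return max(oil)
-- ===== Notes on version B (the rewrite author's own statement) =====
-- stated objective: alternative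
-- what changed: Replaces the per-component BFS flood fill (mutable visited matrix + queue, aggregating min/max column and size while traversing) by whole-grid minimum-label propagation: every oily cell starts with its own flat index, n*m synchronous sweeps take the minimum label over itself and oily neighbours, and one final scan groups cells by label into per-component (count, min col, max col) before the column sums.
import Mathlib
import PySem

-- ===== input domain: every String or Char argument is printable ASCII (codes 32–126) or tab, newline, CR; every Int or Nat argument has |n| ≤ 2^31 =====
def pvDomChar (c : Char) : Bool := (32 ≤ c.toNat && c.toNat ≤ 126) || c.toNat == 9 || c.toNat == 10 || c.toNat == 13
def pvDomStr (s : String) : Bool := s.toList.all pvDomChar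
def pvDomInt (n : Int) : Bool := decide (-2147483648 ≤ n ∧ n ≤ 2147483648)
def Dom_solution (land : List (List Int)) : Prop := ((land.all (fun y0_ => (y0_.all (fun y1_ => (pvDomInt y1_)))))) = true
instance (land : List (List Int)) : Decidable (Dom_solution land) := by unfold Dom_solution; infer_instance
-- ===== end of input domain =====

-- B is an alternative algorithm: min-label propagation over the flat grid instead of per-component BFS
-- (equivalence of the RETURN value; neither program mutates its argument).

-- mat[x][y]: the 2-D read both Pythons do on the grid (and A also on its visited matrix)
def pvGrid (land : List (List Int)) (x y : Int) : Int :=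
  PySem.List.pyGetD (PySem.List.pyGetD land x []) y 0

-- `for col in range(mn, mx+1): oil[col] += cnt` — the identical column-accumulation loop both Pythons contain
def pvAddRange (oil : List Int) (mn mx cnt : Int) : List Int :=
  (PySem.List.pyRange mn (mx + 1) 1).foldl
    (fun o c => PySem.List.pySetD o c (PySem.List.pyGetD o c 0 + cnt)) oil

-- ===== PORT A =====

def pvVisSet (vis : List (List Int)) (x y : Int) : List (List Int) :=
  PySem.List.pySetD vis x (PySem.List.pySetD (PySem.List.pyGetD vis x []) y 1)

def pvDirs : List (Int × Int) := [(-1, 0), (1, 0), (0, -1), (0, 1)]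

-- one neighbour test of A's BFS; state = (min_y, max_y, cnt, visited, queue)
def pvBfsStep (land : List (List Int)) (n m x y : Int)
    (st : Int × Int × Int × List (List Int) × List (Int × Int)) (d : Int × Int) :
    Int × Int × Int × List (List Int) × List (Int × Int) :=
  let nx := x + d.1
  let ny := y + d.2
  if nx < 0 ∨ ny < 0 ∨ n ≤ nx ∨ m ≤ ny then st
  else if pvGrid st.2.2.2.1 nx ny = 0 ∧ pvGrid land nx ny ≠ 0 then
    (min ny st.1, max ny st.2.1, st.2.2.1 + 1, pvVisSet st.2.2.2.1 nx ny,
      st.2.2.2.2 ++ [(nx, ny)])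
  else st

-- A's `while queue:` loop (fuel only makes it total; it never runs out on admitted inputs)
def pvBfsLoop (land : List (List Int)) (n m : Int) :
    Nat → Int × Int × Int × List (List Int) × List (Int × Int) →
    Int × Int × Int × List (List Int) :=
  fun fuel st =>
    match fuel, st with
    | _, (mn, mx, cnt, vis, []) => (mn, mx, cnt, vis)
    | 0, (mn, mx, cnt, vis, _) => (mn, mx, cnt, vis)
    | fuel + 1, (mn, mx, cnt, vis, (x, y) :: qs) =>
      pvBfsLoop land n m fuel (pvDirs.foldl (pvBfsStep land n m x y) (mn, mx, cnt, vis, qs))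

def pvBfs (land : List (List Int)) (n m x y : Int) (vis : List (List Int)) :
    Int × Int × Int × List (List Int) :=
  pvBfsLoop land n m (2 * (n.toNat * m.toNat) + 1) (y, y, 1, pvVisSet vis x y, [(x, y)])

def solution (land : List (List Int)) : Int :=
  let n : Int := PySem.List.len land
  let m : Int := PySem.List.len (PySem.List.pyGetD land 0 [])
  let vis0 : List (List Int) :=
    (PySem.List.pyRange 0 n 1).map (fun _ => (PySem.List.pyRange 0 m 1).map (fun _ => (0 : Int)))
  let oil0 : List Int := (PySem.List.pyRange 0 m 1).map (fun _ => (0 : Int))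
  let st :=
    (PySem.List.pyRange 0 n 1).foldl (fun st x =>
      (PySem.List.pyRange 0 m 1).foldl (fun (st : List (List Int) × List Int) y =>
        if pvGrid st.1 x y = 0 ∧ pvGrid land x y ≠ 0 then
          let r := pvBfs land n m x y st.1
          (r.2.2.2, pvAddRange st.2 r.1 r.2.1 r.2.2.1)
        else st) st) (vis0, oil0)
  ((PySem.List.max? st.2 (fun v => v)).getD 0)

-- ===== PORT B =====

-- flat indices of the in-grid orthogonal neighbours of i (Source B's nbrs)
def pvNbrs (n m i : Int) : List Int :=
  let x := PySem.Int.floordiv i m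
  let y := PySem.Int.mod i m
  (if 0 < x then [i - m] else []) ++ (if x + 1 < n then [i + m] else []) ++
    (if 0 < y then [i - 1] else []) ++ (if y + 1 < m then [i + 1] else [])

-- one propagation sweep: every oily cell takes the min label among itself and oily neighbours
def pvSweep (n m N : Int) (lab : List Int) : List Int :=
  (PySem.List.pyRange 0 N 1).map (fun i =>
    let li := PySem.List.pyGetD lab i 0
    if li < 0 then li
    else
      (PySem.List.min?
        (li :: ((pvNbrs n m i).filter (fun j => 0 ≤ PySem.List.pyGetD lab j 0)).map
          (fun j => PySem.List.pyGetD lab j 0))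
        (fun v => v)).getD 0)

def solution_alt (land : List (List Int)) : Int :=
  let n : Int := PySem.List.len land
  let m : Int := PySem.List.len (PySem.List.pyGetD land 0 [])
  let N : Int := n * m
  let lab0 : List Int :=
    ((PySem.List.pyRange 0 n 1).map (fun x =>
      (PySem.List.pyRange 0 m 1).map (fun y =>
        if pvGrid land x y ≠ 0 then x * m + y else -1))).flatten
  let lab := (PySem.List.pyRange 0 N 1).foldl (fun lab _ => pvSweep n m N lab) lab0
  let agg : PySem.Dict Int (Int × Int × Int) :=
    (PySem.List.pyRange 0 N 1).foldl (fun agg i =>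
      let L := PySem.List.pyGetD lab i 0
      if L < 0 then agg
      else
        let y := PySem.Int.mod i m
        match PySem.Dict.get? agg L with
        | some (c, mn, mx) => PySem.Dict.insert agg L (c + 1, min mn y, max mx y)
        | none => PySem.Dict.insert agg L (1, y, y)) PySem.Dict.empty
  let oil0 : List Int := (PySem.List.pyRange 0 m 1).map (fun _ => (0 : Int))
  let oil := (PySem.Dict.values agg).foldl (fun oil t => pvAddRange oil t.2.1 t.2.2 t.1) oil0
  ((PySem.List.max? oil (fun v => v)).getD 0)

-- ===== PRECONDITION & SPEC =====
-- Pre_ excludes exactly the inputs on which A raises: the empty grid (land[0] → IndexError),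
-- a zero-width first row (max([]) → ValueError), and ragged grids with a row shorter than the
-- first (land[x][y] → IndexError); rows longer than the first are admitted.
def Pre_solution (land : List (List Int)) : Prop :=
  land ≠ [] ∧ 0 < (land.headD []).length ∧ ∀ row ∈ land, (land.headD []).length ≤ row.length
instance (land : List (List Int)) : Decidable (Pre_solution land) := by
  unfold Pre_solution; infer_instance

def pvWitness_solution : List (List Int) := [[1, 0], [0, 1]]

def Spec_solution (land : List (List Int)) (out : Int) : Prop := out = solution_alt land
instance (land : List (List Int)) (out : Int) : Decidable (Spec_solution land out) := by
  unfold Spec_solution; infer_instance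

-- ===== CLAIM (what is proved, stated in full; the proofs are below) =====
def Claim_equal_solution : Prop :=
  ∀ (land : List (List Int)), Dom_solution land → Pre_solution land →
    Spec_solution land (solution land)

-- ===== LEMMAS AND PROOFS =====

-- ---------- grid abstraction ----------

def pvN (land : List (List Int)) : Nat := land.length
def pvM (land : List (List Int)) : Nat := (land.headD []).length
def pvNM (land : List (List Int)) : Nat := pvN land * pvM land
def pvVal (land : List (List Int)) (p : Nat × Nat) : Int := (land.getD p.1 []).getD p.2 0
def pvOkB (land : List (List Int)) (p : Nat × Nat) : Bool :=
  decide (p.1 < pvN land) && decide (p.2 < pvM land) && decide (pvVal land p ≠ 0)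
def pvAdjB (land : List (List Int)) (p q : Nat × Nat) : Bool :=
  pvOkB land p && pvOkB land q &&
    ((p.1 == q.1 && (p.2 + 1 == q.2 || q.2 + 1 == p.2)) ||
     (p.2 == q.2 && (p.1 + 1 == q.1 || q.1 + 1 == p.1)))
def pvCells (land : List (List Int)) : Finset (Nat × Nat) :=
  Finset.range (pvN land) ×ˢ Finset.range (pvM land)
def pvExpand (land : List (List Int)) (S : Finset (Nat × Nat)) : Finset (Nat × Nat) :=
  S ∪ (pvCells land).filter (fun q => ∃ p ∈ S, pvAdjB land p q = true)
def pvBall (land : List (List Int)) (p : Nat × Nat) (k : Nat) : Finset (Nat × Nat) :=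
  (pvExpand land)^[k] {p}
def pvComp (land : List (List Int)) (p : Nat × Nat) : Finset (Nat × Nat) :=
  pvBall land p (pvNM land)
def pvIdx (land : List (List Int)) (p : Nat × Nat) : Nat := p.1 * pvM land + p.2
def pvCellF (land : List (List Int)) (i : Nat) : Nat × Nat := (i / pvM land, i % pvM land)

def fminI (S : Finset Int) : Int := S.min.untopD 0
def fmaxI (S : Finset Int) : Int := S.max.unbotD 0
def pvColsI (S : Finset (Nat × Nat)) : Finset Int := S.image (fun q => (q.2 : Int))

def pvCnt (land : List (List Int)) (p : Nat × Nat) : Int := ((pvComp land p).card : Int)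
def pvMnCol (land : List (List Int)) (p : Nat × Nat) : Int := fminI (pvColsI (pvComp land p))
def pvMxCol (land : List (List Int)) (p : Nat × Nat) : Int := fmaxI (pvColsI (pvComp land p))

def pvRepB (land : List (List Int)) (p : Nat × Nat) : Bool :=
  pvOkB land p && decide (∀ q ∈ pvComp land p, pvIdx land p ≤ pvIdx land q)
def pvRepsUpTo (land : List (List Int)) (t : Nat) : List (Nat × Nat) :=
  ((List.range t).map (pvCellF land)).filter (pvRepB land)
def pvReps (land : List (List Int)) : List (Nat × Nat) := pvRepsUpTo land (pvNM land)

def pvOil0 (land : List (List Int)) : List Int :=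
  (PySem.List.pyRange 0 (pvM land : Int) 1).map (fun _ => (0 : Int))

-- the common canonical value both ports are proved to compute
def pvResult (land : List (List Int)) : Int :=
  (PySem.List.max?
    ((pvReps land).foldl
      (fun oil p => pvAddRange oil (pvMnCol land p) (pvMxCol land p) (pvCnt land p))
      (pvOil0 land))
    (fun v => v)).getD 0

-- ---------- fmin/fmax ----------

theorem fminI_spec (S : Finset Int) (h : S.Nonempty) : fminI S ∈ S ∧ ∀ v ∈ S, fminI S ≤ v := by
  obtain ⟨a, ha⟩ := Finset.min_of_nonempty h
  have he : fminI S = a := by simp [fminI, ha]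
  rw [he]
  refine ⟨Finset.mem_of_min ha, fun v hv => ?_⟩
  have := Finset.min_le hv
  rw [ha] at this
  exact_mod_cast this

theorem fmaxI_spec (S : Finset Int) (h : S.Nonempty) : fmaxI S ∈ S ∧ ∀ v ∈ S, v ≤ fmaxI S := by
  obtain ⟨a, ha⟩ := Finset.max_of_nonempty h
  have he : fmaxI S = a := by simp [fmaxI, ha]
  rw [he]
  refine ⟨Finset.mem_of_max ha, fun v hv => ?_⟩
  have := Finset.le_max hv
  rw [ha] at this
  exact_mod_cast this

theorem fminI_unique (S : Finset Int) (v : Int) (hmem : v ∈ S) (hle : ∀ w ∈ S, v ≤ w) :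
    fminI S = v := by
  obtain ⟨h1, h2⟩ := fminI_spec S ⟨v, hmem⟩
  exact le_antisymm (h2 v hmem) (hle _ h1)

theorem fmaxI_unique (S : Finset Int) (v : Int) (hmem : v ∈ S) (hle : ∀ w ∈ S, w ≤ v) :
    fmaxI S = v := by
  obtain ⟨h1, h2⟩ := fmaxI_spec S ⟨v, hmem⟩
  exact le_antisymm (hle _ h1) (h2 v hmem)

-- ---------- expand / ball / comp ----------

theorem pvAdjB_symm (land : List (List Int)) (p q : Nat × Nat) :
    pvAdjB land p q = pvAdjB land q p := by
  rw [Bool.eq_iff_iff]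
  simp only [pvAdjB, Bool.and_eq_true, Bool.or_eq_true, beq_iff_eq]
  constructor <;> (rintro ⟨⟨ho1, ho2⟩, hx⟩; exact ⟨⟨ho2, ho1⟩, by omega⟩)

theorem pvOk_of_pvAdjB (land : List (List Int)) (p q : Nat × Nat)
    (h : pvAdjB land p q = true) : pvOkB land p = true ∧ pvOkB land q = true := by
  simp only [pvAdjB, Bool.and_eq_true] at h; exact ⟨h.1.1, h.1.2⟩

theorem pvMem_cells_of_ok (land : List (List Int)) (p : Nat × Nat)
    (h : pvOkB land p = true) : p ∈ pvCells land := by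
  simp only [pvOkB, Bool.and_eq_true, decide_eq_true_eq] at h
  simp [pvCells, Finset.mem_product, h.1.1, h.1.2]

theorem pvSubset_expand (land : List (List Int)) (S : Finset (Nat × Nat)) :
    S ⊆ pvExpand land S := Finset.subset_union_left

theorem pvExpand_mono (land : List (List Int)) : Monotone (pvExpand land) := by
  intro S T h q hq
  simp only [pvExpand, Finset.mem_union, Finset.mem_filter] at hq ⊢
  rcases hq with hq | ⟨hc, p, hp, ha⟩
  · exact Or.inl (h hq)
  · exact Or.inr ⟨hc, p, h hp, ha⟩

theorem pvMem_expand (land : List (List Int)) (S : Finset (Nat × Nat)) (q : Nat × Nat) :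
    q ∈ pvExpand land S ↔ q ∈ S ∨ ∃ p ∈ S, pvAdjB land p q = true := by
  simp only [pvExpand, Finset.mem_union, Finset.mem_filter]
  constructor
  · rintro (h | ⟨-, h⟩); exacts [Or.inl h, Or.inr h]
  · rintro (h | ⟨p, hp, ha⟩)
    · exact Or.inl h
    · exact Or.inr ⟨pvMem_cells_of_ok land q (pvOk_of_pvAdjB land p q ha).2, p, hp, ha⟩

theorem pvBall_zero (land : List (List Int)) (p : Nat × Nat) : pvBall land p 0 = {p} := rfl

theorem pvBall_succ (land : List (List Int)) (p : Nat × Nat) (k : Nat) :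
    pvBall land p (k + 1) = pvExpand land (pvBall land p k) :=
  Function.iterate_succ_apply' _ _ _

theorem pvBall_succ_inner (land : List (List Int)) (p : Nat × Nat) (k : Nat) :
    pvBall land p (k + 1) = (pvExpand land)^[k] (pvExpand land {p}) :=
  Function.iterate_succ_apply _ _ _

theorem pvIterate_mono (land : List (List Int)) (k : Nat) :
    Monotone ((pvExpand land)^[k]) := Monotone.iterate (pvExpand_mono land) k

theorem pvBall_mono (land : List (List Int)) (p : Nat × Nat) {j k : Nat} (h : j ≤ k) :
    pvBall land p j ⊆ pvBall land p k := by
  induction k, h using Nat.le_induction with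
  | base => exact subset_rfl
  | succ k hk ih => rw [pvBall_succ]; exact ih.trans (pvSubset_expand land _)

theorem pvMem_ball_self (land : List (List Int)) (p : Nat × Nat) (k : Nat) :
    p ∈ pvBall land p k := by
  induction k with
  | zero => simp [pvBall]
  | succ k ih => rw [pvBall_succ]; exact pvSubset_expand land _ ih

theorem pvBall_trans (land : List (List Int)) (p q : Nat × Nat) (j k : Nat)
    (h : q ∈ pvBall land p j) : pvBall land q k ⊆ pvBall land p (j + k) := by
  have h1 : pvBall land q k ⊆ (pvExpand land)^[k] (pvBall land p j) :=
    pvIterate_mono land k (Finset.singleton_subset_iff.mpr h)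
  have h2 : (pvExpand land)^[k] (pvBall land p j) = pvBall land p (j + k) := by
    show (pvExpand land)^[k] ((pvExpand land)^[j] {p}) = (pvExpand land)^[j + k] {p}
    rw [Nat.add_comm j k, Function.iterate_add_apply]
  rw [← h2]; exact h1

theorem pvMem_iterate_exists (land : List (List Int)) (k : Nat) (S : Finset (Nat × Nat))
    (r : Nat × Nat) (h : r ∈ (pvExpand land)^[k] S) : ∃ q ∈ S, r ∈ pvBall land q k := by
  induction k generalizing r with
  | zero => exact ⟨r, h, pvMem_ball_self land r 0⟩
  | succ k ih =>
    rw [Function.iterate_succ_apply'] at h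
    rcases (pvMem_expand land _ r).mp h with h | ⟨t, ht, ha⟩
    · obtain ⟨q, hq, hr⟩ := ih r h
      exact ⟨q, hq, pvBall_mono land q (Nat.le_succ k) hr⟩
    · obtain ⟨q, hq, hr⟩ := ih t ht
      refine ⟨q, hq, ?_⟩
      rw [pvBall_succ]
      exact (pvMem_expand land _ r).mpr (Or.inr ⟨t, hr, ha⟩)

theorem pvBall_symm (land : List (List Int)) (k : Nat) (p q : Nat × Nat)
    (h : q ∈ pvBall land p k) : p ∈ pvBall land q k := by
  induction k generalizing p q with
  | zero => simp [pvBall] at h ⊢; exact h.symm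
  | succ k ih =>
    rw [pvBall_succ] at h
    rcases (pvMem_expand land _ q).mp h with h | ⟨r, hr, ha⟩
    · exact pvBall_mono land q (Nat.le_succ k) (ih p q h)
    · have hp : p ∈ pvBall land r k := ih p r hr
      have hradj : r ∈ pvBall land q 1 := by
        rw [pvBall_succ, pvBall_zero]
        refine (pvMem_expand land _ r).mpr (Or.inr ⟨q, Finset.mem_singleton_self q, ?_⟩)
        rw [pvAdjB_symm]; exact ha
      have := pvBall_trans land q r 1 k hradj hp
      rwa [Nat.add_comm] at this

theorem pvBall_subset_cells (land : List (List Int)) (p : Nat × Nat)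
    (hp : p ∈ pvCells land) (k : Nat) : pvBall land p k ⊆ pvCells land := by
  induction k with
  | zero => simpa [pvBall]
  | succ k ih =>
    rw [pvBall_succ]
    intro q hq
    rcases (pvMem_expand land _ q).mp hq with h | ⟨t, _, ha⟩
    · exact ih h
    · exact pvMem_cells_of_ok land q (pvOk_of_pvAdjB land t q ha).2

theorem pvOk_of_mem_ball (land : List (List Int)) (p : Nat × Nat)
    (hp : pvOkB land p = true) (k : Nat) (q : Nat × Nat) (h : q ∈ pvBall land p k) :
    pvOkB land q = true := by
  induction k generalizing q with
  | zero => simp [pvBall] at h; subst h; exact hp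
  | succ k ih =>
    rw [pvBall_succ] at h
    rcases (pvMem_expand land _ q).mp h with h | ⟨t, _, ha⟩
    · exact ih q h
    · exact (pvOk_of_pvAdjB land t q ha).2

theorem pvFix_iterate (land : List (List Int)) (S : Finset (Nat × Nat))
    (h : pvExpand land S = S) (j : Nat) : (pvExpand land)^[j] S = S := by
  induction j with
  | zero => rfl
  | succ j ih => rw [Function.iterate_succ_apply', ih, h]

theorem pvBall_stable (land : List (List Int)) (p : Nat × Nat) (k : Nat)
    (hfix : pvExpand land (pvBall land p k) = pvBall land p k) {j : Nat} (hkj : k ≤ j) :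
    pvBall land p j = pvBall land p k := by
  have : pvBall land p j = (pvExpand land)^[j - k] (pvBall land p k) := by
    show (pvExpand land)^[j] {p} = (pvExpand land)^[j - k] ((pvExpand land)^[k] {p})
    rw [← Function.iterate_add_apply, Nat.sub_add_cancel hkj]
  rw [this, pvFix_iterate land _ hfix]

theorem pvCard_cells (land : List (List Int)) : (pvCells land).card = pvNM land := by
  simp [pvCells, pvNM]

theorem pvStab (land : List (List Int)) (p : Nat × Nat) (hp : p ∈ pvCells land) :
    ∃ k, k ≤ pvNM land ∧ pvExpand land (pvBall land p k) = pvBall land p k := by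
  by_contra hno
  push Not at hno
  have hgrow : ∀ k, k ≤ pvNM land + 1 → k + 1 ≤ (pvBall land p k).card := by
    intro k
    induction k with
    | zero => intro _; simp [pvBall]
    | succ k ih =>
      intro hk
      have h1 : k + 1 ≤ (pvBall land p k).card := ih (by omega)
      have hne : pvBall land p k ≠ pvBall land p (k + 1) := by
        rw [pvBall_succ]
        intro he
        exact hno k (by omega) he.symm
      have hss : pvBall land p k ⊂ pvBall land p (k + 1) :=
        lt_of_le_of_ne (pvBall_mono land p (Nat.le_succ k)) hne
      have := Finset.card_lt_card hss
      omega
  have h1 := hgrow (pvNM land + 1) (le_refl _)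
  have h2 : pvBall land p (pvNM land + 1) ⊆ pvCells land :=
    pvBall_subset_cells land p hp _
  have := Finset.card_le_card h2
  rw [pvCard_cells] at this
  omega

theorem pvComp_fix (land : List (List Int)) (p : Nat × Nat) (hp : p ∈ pvCells land) :
    pvExpand land (pvComp land p) = pvComp land p := by
  obtain ⟨k, hk, hfix⟩ := pvStab land p hp
  have h1 : pvBall land p (pvNM land) = pvBall land p k := pvBall_stable land p k hfix hk
  show pvExpand land (pvBall land p (pvNM land)) = pvBall land p (pvNM land)
  rw [h1, hfix]

theorem pvBall_eq_comp (land : List (List Int)) (p : Nat × Nat) (hp : p ∈ pvCells land)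
    {j : Nat} (h : pvNM land ≤ j) : pvBall land p j = pvComp land p := by
  obtain ⟨k, hk, hfix⟩ := pvStab land p hp
  show pvBall land p j = pvBall land p (pvNM land)
  rw [pvBall_stable land p k hfix (hk.trans h), pvBall_stable land p k hfix hk]

theorem pvMem_comp_self (land : List (List Int)) (p : Nat × Nat) : p ∈ pvComp land p :=
  pvMem_ball_self land p _

theorem pvComp_closed (land : List (List Int)) (p : Nat × Nat) (hp : p ∈ pvCells land)
    (q r : Nat × Nat) (hq : q ∈ pvComp land p) (ha : pvAdjB land q r = true) :
    r ∈ pvComp land p := by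
  rw [← pvComp_fix land p hp]
  exact (pvMem_expand land _ r).mpr (Or.inr ⟨q, hq, ha⟩)

theorem pvComp_eq_of_mem (land : List (List Int)) (p q : Nat × Nat) (hp : p ∈ pvCells land)
    (hq : q ∈ pvComp land p) : pvComp land q = pvComp land p := by
  have hqc : q ∈ pvCells land := pvBall_subset_cells land p hp (pvNM land) hq
  have hsub : ∀ a b : Nat × Nat, a ∈ pvCells land → b ∈ pvComp land a →
      pvComp land b ⊆ pvComp land a := by
    intro a b ha hb
    have := pvBall_trans land a b (pvNM land) (pvNM land) hb
    intro r hr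
    have hr2 := this hr
    rwa [pvBall_eq_comp land a ha (Nat.le_add_right _ _)] at hr2
  have h1 : pvComp land q ⊆ pvComp land p := hsub p q hp hq
  have h2 : pvComp land p ⊆ pvComp land q :=
    hsub q p hqc (pvBall_symm land (pvNM land) p q hq)
  exact le_antisymm h1 h2

theorem pvOk_of_mem_comp (land : List (List Int)) (p : Nat × Nat)
    (hp : pvOkB land p = true) (q : Nat × Nat) (h : q ∈ pvComp land p) :
    pvOkB land q = true :=
  pvOk_of_mem_ball land p hp _ q h

-- characterization: any set containing s, inside comp s, closed modulo an s-component-disjoint V0, is comp s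
theorem pvComp_char (land : List (List Int)) (s : Nat × Nat) (hs : s ∈ pvCells land)
    (T V0 : Finset (Nat × Nat)) (hsT : s ∈ T) (hT : ∀ t ∈ T, t ∈ pvComp land s)
    (hcl : ∀ t ∈ T, ∀ r, pvAdjB land t r = true → r ∈ V0 ∪ T)
    (hdisj : ∀ q ∈ pvComp land s, q ∉ V0) : T = pvComp land s := by
  have hsub : ∀ k, pvBall land s k ⊆ T := by
    intro k
    induction k with
    | zero => simpa [pvBall]
    | succ k ih =>
      rw [pvBall_succ]
      intro r hr
      rcases (pvMem_expand land _ r).mp hr with h | ⟨t, ht, ha⟩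
      · exact ih h
      · have htT : t ∈ T := ih ht
        have hrc : r ∈ pvComp land s :=
          pvComp_closed land s hs t r (hT t htT) ha
        rcases Finset.mem_union.mp (hcl t htT r ha) with h | h
        · exact absurd h (hdisj r hrc)
        · exact h
  refine le_antisymm (fun t ht => hT t ht) (hsub (pvNM land))

-- ---------- misc arithmetic/index helpers ----------

theorem pvIdx_cellF (land : List (List Int)) (i : Nat) : pvIdx land (pvCellF land i) = i := by
  simp only [pvIdx, pvCellF]
  rw [Nat.mul_comm]
  exact Nat.div_add_mod i (pvM land)

theorem pvCellF_idx (land : List (List Int)) (p : Nat × Nat) (hp : p ∈ pvCells land) :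
    pvCellF land (pvIdx land p) = p := by
  simp only [pvCells, Finset.mem_product, Finset.mem_range] at hp
  simp only [pvCellF, pvIdx]
  have hm : 0 < pvM land := Nat.lt_of_le_of_lt (Nat.zero_le _) hp.2
  have h1 : (p.1 * pvM land + p.2) / pvM land = p.1 := by
    rw [Nat.mul_comm, Nat.mul_add_div hm, Nat.div_eq_of_lt hp.2, Nat.add_zero]
  have h2 : (p.1 * pvM land + p.2) % pvM land = p.2 := by
    rw [Nat.mul_comm, Nat.mul_add_mod, Nat.mod_eq_of_lt hp.2]
  rw [h1, h2]

theorem pvIdx_lt_NM (land : List (List Int)) (p : Nat × Nat) (hp : p ∈ pvCells land) :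
    pvIdx land p < pvNM land := by
  simp only [pvCells, Finset.mem_product, Finset.mem_range] at hp
  calc pvIdx land p < (p.1 + 1) * pvM land := by simp only [pvIdx]; nlinarith [hp.2]
  _ ≤ pvN land * pvM land := Nat.mul_le_mul_right _ hp.1
  _ = pvNM land := rfl

theorem pvCellF_mem_cells (land : List (List Int)) (i : Nat) (h : i < pvNM land) :
    pvCellF land i ∈ pvCells land := by
  have hm : 0 < pvM land := by
    by_contra hm
    have : pvM land = 0 := by omega
    simp [pvNM, this] at h
  simp only [pvCellF, pvCells, Finset.mem_product, Finset.mem_range]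
  refine ⟨Nat.div_lt_of_lt_mul ?_, Nat.mod_lt _ hm⟩
  rw [Nat.mul_comm]
  exact h

-- ---------- reading / writing the matrices ----------

theorem pvGrid_natCast (mat : List (List Int)) (x y : Nat) :
    pvGrid mat (x : Int) (y : Int) = (mat.getD x []).getD y 0 := by
  simp [pvGrid]

theorem pvOkB_iff_val (land : List (List Int)) (p : Nat × Nat) (hp : p ∈ pvCells land) :
    pvOkB land p = true ↔ pvVal land p ≠ 0 := by
  simp only [pvCells, Finset.mem_product, Finset.mem_range] at hp
  simp [pvOkB, hp.1, hp.2]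

def pvVisRel (land : List (List Int)) (vis : List (List Int)) (S : Finset (Nat × Nat)) : Prop :=
  vis.length = pvN land ∧ (∀ r ∈ vis, r.length = pvM land) ∧
    ∀ p : Nat × Nat, p ∈ pvCells land → (((vis.getD p.1 []).getD p.2 0 ≠ 0) ↔ p ∈ S)

theorem pvVisRel_get (land vis : List (List Int)) (S : Finset (Nat × Nat))
    (h : pvVisRel land vis S) (p : Nat × Nat) (hp : p ∈ pvCells land) :
    pvGrid vis (p.1 : Int) (p.2 : Int) = 0 ↔ p ∉ S := by
  rw [pvGrid_natCast]
  have := h.2.2 p hp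
  constructor
  · intro h0 hin
    exact (this.mpr hin) h0
  · intro hout
    by_contra hne
    exact hout (this.mp hne)

theorem pvVisRel_set (land vis : List (List Int)) (S : Finset (Nat × Nat))
    (h : pvVisRel land vis S) (p : Nat × Nat) (hp : p ∈ pvCells land) :
    pvVisRel land (pvVisSet vis (p.1 : Int) (p.2 : Int)) (insert p S) := by
  obtain ⟨p1, p2⟩ := p
  simp only [pvCells, Finset.mem_product, Finset.mem_range] at hp
  obtain ⟨hlen, hrows, hget⟩ := h
  have hset : pvVisSet vis (p1 : Int) (p2 : Int) =
      vis.set p1 ((vis.getD p1 []).set p2 1) := by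
    simp [pvVisSet]
  have h1n : p1 < vis.length := by rw [hlen]; exact hp.1
  have hrowlen : (vis.getD p1 []).length = pvM land := by
    rw [List.getD_eq_getElem vis [] h1n]
    exact hrows _ (List.getElem_mem h1n)
  have h2m : p2 < (vis.getD p1 []).length := by rw [hrowlen]; exact hp.2
  rw [hset]
  refine ⟨by simp [hlen], ?_, ?_⟩
  · intro r hr
    rcases List.mem_or_eq_of_mem_set hr with hr | hr
    · exact hrows r hr
    · rw [hr, List.length_set]; exact hrowlen
  · rintro ⟨q1, q2⟩ hqc
    simp only [] at *
    by_cases h1 : q1 = p1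
    · subst h1
      have hD : (vis.set q1 ((vis.getD q1 []).set p2 1)).getD q1 [] =
          (vis.getD q1 []).set p2 1 := by
        rw [List.getD_eq_getElem _ [] (by rw [List.length_set]; exact h1n)]
        exact List.getElem_set_self _
      rw [hD]
      by_cases h2 : q2 = p2
      · subst h2
        have hval : ((vis.getD q1 []).set q2 1).getD q2 0 = 1 := by
          rw [List.getD_eq_getElem _ 0 (by rw [List.length_set]; exact h2m)]
          exact List.getElem_set_self _
        rw [hval]
        simp
      · have hval : ((vis.getD q1 []).set p2 1).getD q2 0 = (vis.getD q1 []).getD q2 0 := by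
          simp [List.getD, List.getElem?_set_ne (Ne.symm h2)]
        rw [hval, hget _ hqc]
        have hqp : ((q1, q2) : Nat × Nat) ≠ (q1, p2) := by simp [h2]
        simp [Finset.mem_insert, hqp]
    · have hD : (vis.set p1 ((vis.getD p1 []).set p2 1)).getD q1 [] =
          vis.getD q1 [] := by
        simp [List.getD, List.getElem?_set_ne (Ne.symm h1)]
      rw [hD, hget _ hqc]
      have hqp : ((q1, q2) : Nat × Nat) ≠ (p1, p2) := by simp [h1]
      simp [Finset.mem_insert, hqp]

theorem pvVisRel_init (land : List (List Int)) :
    pvVisRel land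
      ((PySem.List.pyRange 0 (pvN land : Int) 1).map
        (fun _ => (PySem.List.pyRange 0 (pvM land : Int) 1).map (fun _ => (0 : Int)))) ∅ := by
  have hlen1 : (PySem.List.pyRange 0 (pvN land : Int) 1).length = pvN land := by
    rw [PySem.List.length_pyRange_one]; simp
  have hlen2 : (PySem.List.pyRange 0 (pvM land : Int) 1).length = pvM land := by
    rw [PySem.List.length_pyRange_one]; simp
  refine ⟨by simp [hlen1], ?_, ?_⟩
  · intro r hr
    rcases List.mem_map.mp hr with ⟨a, _, he⟩
    rw [← he]; simp [hlen2]
  · intro p hp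
    simp only [pvCells, Finset.mem_product, Finset.mem_range] at hp
    have h1 : p.1 < (List.map (fun _ => (PySem.List.pyRange 0 (pvM land : Int) 1).map
        (fun _ => (0 : Int))) (PySem.List.pyRange 0 (pvN land : Int) 1)).length := by
      simp [hlen1]; exact hp.1
    rw [List.getD_eq_getElem _ [] h1, List.getElem_map]
    have h2 : p.2 < ((PySem.List.pyRange 0 (pvM land : Int) 1).map (fun _ => (0:Int))).length := by
      simp [hlen2]; exact hp.2
    rw [List.getD_eq_getElem _ 0 h2, List.getElem_map]
    simp

-- ---------- BFS loop invariant ----------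

def pvToI (p : Nat × Nat) : Int × Int := ((p.1 : Int), (p.2 : Int))

def pvInvB (land : List (List Int)) (V0 : Finset (Nat × Nat)) (s : Nat × Nat)
    (T : Finset (Nat × Nat)) (ql : List (Nat × Nat))
    (st : Int × Int × Int × List (List Int) × List (Int × Int)) : Prop :=
  pvVisRel land st.2.2.2.1 (V0 ∪ T) ∧
  st.2.2.2.2 = ql.map pvToI ∧
  ql.Nodup ∧ (∀ p ∈ ql, p ∈ T) ∧
  s ∈ T ∧ (∀ t ∈ T, t ∈ pvComp land s) ∧
  st.2.2.1 = (T.card : Int) ∧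
  (∀ q ∈ T, st.1 ≤ (q.2 : Int)) ∧ (∃ q ∈ T, st.1 = (q.2 : Int)) ∧
  (∀ q ∈ T, (q.2 : Int) ≤ st.2.1) ∧ (∃ q ∈ T, st.2.1 = (q.2 : Int)) ∧
  (∀ t ∈ T, t ∉ ql → ∀ r, pvAdjB land t r = true → r ∈ V0 ∪ T)

def pvMidInv (land : List (List Int)) (V0 : Finset (Nat × Nat)) (s p0 : Nat × Nat)
    (T : Finset (Nat × Nat)) (ql : List (Nat × Nat)) (D : List (Int × Int))
    (st : Int × Int × Int × List (List Int) × List (Int × Int)) : Prop :=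
  pvVisRel land st.2.2.2.1 (V0 ∪ T) ∧
  st.2.2.2.2 = ql.map pvToI ∧
  ql.Nodup ∧ (∀ p ∈ ql, p ∈ T) ∧ p0 ∉ ql ∧ p0 ∈ T ∧
  s ∈ T ∧ (∀ t ∈ T, t ∈ pvComp land s) ∧
  st.2.2.1 = (T.card : Int) ∧
  (∀ q ∈ T, st.1 ≤ (q.2 : Int)) ∧ (∃ q ∈ T, st.1 = (q.2 : Int)) ∧
  (∀ q ∈ T, (q.2 : Int) ≤ st.2.1) ∧ (∃ q ∈ T, st.2.1 = (q.2 : Int)) ∧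
  (∀ t ∈ T, t ∉ ql → t ≠ p0 → ∀ r, pvAdjB land t r = true → r ∈ V0 ∪ T) ∧
  (∀ d ∈ D, ∀ r : Nat × Nat, pvAdjB land p0 r = true →
    ((r.1 : Int) = (p0.1 : Int) + d.1 ∧ (r.2 : Int) = (p0.2 : Int) + d.2) → r ∈ V0 ∪ T)

theorem pvAdj_cases (land : List (List Int)) (p r : Nat × Nat)
    (h : pvAdjB land p r = true) :
    ∃ d ∈ pvDirs, (r.1 : Int) = (p.1 : Int) + d.1 ∧ (r.2 : Int) = (p.2 : Int) + d.2 := by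
  simp only [pvAdjB, Bool.and_eq_true, Bool.or_eq_true, beq_iff_eq] at h
  rcases h.2 with ⟨h1, h2 | h2⟩ | ⟨h1, h2 | h2⟩
  · exact ⟨(0, 1), by simp [pvDirs], by push_cast; omega⟩
  · exact ⟨(0, -1), by simp [pvDirs], by push_cast; omega⟩
  · exact ⟨(1, 0), by simp [pvDirs], by push_cast; omega⟩
  · exact ⟨(-1, 0), by simp [pvDirs], by push_cast; omega⟩

theorem pvBfsStep_spec (land : List (List Int)) (V0 : Finset (Nat × Nat))
    (_hV0 : V0 ⊆ pvCells land) (s p0 : Nat × Nat) (hok : pvOkB land s = true)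
    (T : Finset (Nat × Nat)) (ql : List (Nat × Nat)) (D : List (Int × Int))
    (st : Int × Int × Int × List (List Int) × List (Int × Int))
    (hinv : pvMidInv land V0 s p0 T ql D st) (d : Int × Int) (hd : d ∈ pvDirs) :
    ∃ T' ql', T ⊆ T' ∧
      pvMidInv land V0 s p0 T' ql' (D ++ [d])
        (pvBfsStep land (pvN land : Int) (pvM land : Int) (p0.1 : Int) (p0.2 : Int) st d) ∧
      ql'.length + 2 * ((pvCells land \ (V0 ∪ T')).card) ≤
        ql.length + 2 * ((pvCells land \ (V0 ∪ T)).card) := by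
  obtain ⟨mn, mx, cnt, vis, q⟩ := st
  obtain ⟨hvr, hq, hnd, hqT, hp0q, hp0T, hsT, hTc, hcnt, hmn1, hmn2, hmx1, hmx2, hclo, hD⟩ := hinv
  dsimp only at hvr hq hcnt hmn1 hmn2 hmx1 hmx2
  have hscell : s ∈ pvCells land := pvMem_cells_of_ok land s hok
  have hokp0 : pvOkB land p0 = true := pvOk_of_mem_comp land s hok p0 (hTc p0 hp0T)
  have hp0cell : p0 ∈ pvCells land := pvMem_cells_of_ok land p0 hokp0
  simp only [pvBfsStep]
  set nx : Int := (p0.1 : Int) + d.1 with hnx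
  set ny : Int := (p0.2 : Int) + d.2 with hny
  by_cases hg : nx < 0 ∨ ny < 0 ∨ (pvN land : Int) ≤ nx ∨ (pvM land : Int) ≤ ny
  · refine ⟨T, ql, subset_rfl, ?_, le_refl _⟩
    rw [if_pos hg]
    refine ⟨hvr, hq, hnd, hqT, hp0q, hp0T, hsT, hTc, hcnt, hmn1, hmn2, hmx1, hmx2, hclo, ?_⟩
    intro d' hd' r hadj ⟨he1, he2⟩
    rcases List.mem_append.mp hd' with hd' | hd'
    · exact hD d' hd' r hadj ⟨he1, he2⟩
    · simp only [List.mem_singleton] at hd'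
      subst hd'
      have hokr := (pvOk_of_pvAdjB land p0 r hadj).2
      have hrc := pvMem_cells_of_ok land r hokr
      simp only [pvCells, Finset.mem_product, Finset.mem_range] at hrc
      exfalso
      rcases hg with hg | hg | hg | hg <;> omega
  · push Not at hg
    obtain ⟨hg1, hg2, hg3, hg4⟩ := hg
    rw [if_neg (by push Not; exact ⟨hg1, hg2, hg3, hg4⟩)]
    set q' : Nat × Nat := (nx.toNat, ny.toNat) with hq'
    have he1 : (q'.1 : Int) = nx := Int.toNat_of_nonneg hg1
    have he2 : (q'.2 : Int) = ny := Int.toNat_of_nonneg hg2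
    have hq'c : q' ∈ pvCells land := by
      simp only [pvCells, Finset.mem_product, Finset.mem_range]
      constructor <;> omega
    have hgridq' : pvGrid land nx ny = pvVal land q' := by
      rw [← he1, ← he2, pvGrid_natCast]; rfl
    have hvisq' : pvGrid vis nx ny = 0 ↔ q' ∉ V0 ∪ T := by
      rw [← he1, ← he2]
      exact pvVisRel_get land vis (V0 ∪ T) hvr q' hq'c
    have hr_eq_q' : ∀ r : Nat × Nat,
        ((r.1 : Int) = nx ∧ (r.2 : Int) = ny) → r = q' := by
      rintro r ⟨hr1, hr2⟩
      have : r.1 = q'.1 := by omega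
      have : r.2 = q'.2 := by omega
      exact Prod.ext (by omega) (by omega)
    by_cases hb : pvGrid vis nx ny = 0 ∧ pvGrid land nx ny ≠ 0
    · -- the neighbour is fresh and oily: it is marked, counted and enqueued
      have hnotin : q' ∉ V0 ∪ T := hvisq'.mp hb.1
      have hokq' : pvOkB land q' = true := by
        rw [pvOkB_iff_val land q' hq'c]
        rw [hgridq'] at hb
        exact hb.2
      have hadjq' : pvAdjB land p0 q' = true := by
        simp only [pvAdjB, hokp0, hokq', Bool.true_and, Bool.and_eq_true, Bool.or_eq_true,
          beq_iff_eq]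
        have hd4 : d = (-1, 0) ∨ d = (1, 0) ∨ d = (0, -1) ∨ d = (0, 1) := by
          simpa [pvDirs] using hd
        rcases hd4 with rfl | rfl | rfl | rfl <;> simp at he1 he2 hnx hny <;> omega
      have hq'T : q' ∉ T := fun h => hnotin (Finset.mem_union_right _ h)
      have hq'ql : q' ∉ ql := fun h => hq'T (hqT q' h)
      have hq'comp : q' ∈ pvComp land s :=
        pvComp_closed land s hscell p0 q' (hTc p0 hp0T) hadjq'
      refine ⟨insert q' T, ql ++ [q'], Finset.subset_insert _ _, ?_, ?_⟩
      · rw [if_pos hb]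
        refine ⟨?_, ?_, ?_, ?_, ?_, ?_, ?_, ?_, ?_, ?_, ?_, ?_, ?_, ?_, ?_⟩
        · show pvVisRel land (pvVisSet vis nx ny) (V0 ∪ insert q' T)
          rw [← he1, ← he2, Finset.union_insert]
          exact pvVisRel_set land vis (V0 ∪ T) hvr q' hq'c
        · show q ++ [(nx, ny)] = (ql ++ [q']).map pvToI
          rw [List.map_append, ← hq]
          simp [pvToI, he1, he2]
        · exact List.Nodup.append hnd (List.nodup_singleton q')
            (by simp [List.disjoint_singleton]; exact hq'ql)
        · intro p hp
          rcases List.mem_append.mp hp with hp | hp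
          · exact Finset.mem_insert_of_mem (hqT p hp)
          · simp only [List.mem_singleton] at hp; subst hp; exact Finset.mem_insert_self _ _
        · intro hc
          rcases List.mem_append.mp hc with hc | hc
          · exact hp0q hc
          · simp only [List.mem_singleton] at hc; exact hq'T (hc ▸ hp0T)
        · exact Finset.mem_insert_of_mem hp0T
        · exact Finset.mem_insert_of_mem hsT
        · intro t ht
          rcases Finset.mem_insert.mp ht with rfl | ht
          · exact hq'comp
          · exact hTc t ht
        · show cnt + 1 = ((insert q' T).card : Int)
          rw [Finset.card_insert_of_notMem hq'T, hcnt]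
          push_cast; ring
        · intro t ht
          rcases Finset.mem_insert.mp ht with rfl | ht
          · rw [he2]; exact min_le_left _ _
          · exact le_trans (min_le_right _ _) (hmn1 t ht)
        · rcases le_total ny mn with h | h
          · exact ⟨q', Finset.mem_insert_self _ _, by rw [min_eq_left h, he2]⟩
          · obtain ⟨w, hw, hwe⟩ := hmn2
            exact ⟨w, Finset.mem_insert_of_mem hw, by rw [min_eq_right h]; exact hwe⟩
        · intro t ht
          rcases Finset.mem_insert.mp ht with rfl | ht
          · rw [he2]; exact le_max_left _ _
          · exact le_trans (hmx1 t ht) (le_max_right _ _)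
        · rcases le_total mx ny with h | h
          · exact ⟨q', Finset.mem_insert_self _ _, by rw [max_eq_left h, he2]⟩
          · obtain ⟨w, hw, hwe⟩ := hmx2
            exact ⟨w, Finset.mem_insert_of_mem hw, by rw [max_eq_right h]; exact hwe⟩
        · intro t ht htq htp r hadj
          have ht' : t ∈ T := by
            rcases Finset.mem_insert.mp ht with rfl | ht'
            · exact absurd (List.mem_append_right ql (List.mem_singleton_self _)) htq
            · exact ht'
          have := hclo t ht' (fun h => htq (List.mem_append_left _ h)) htp r hadj
          rw [Finset.union_insert]
          exact Finset.mem_insert_of_mem this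
        · intro d' hd' r hadj hco
          rw [Finset.union_insert]
          rcases List.mem_append.mp hd' with hd' | hd'
          · exact Finset.mem_insert_of_mem (hD d' hd' r hadj hco)
          · simp only [List.mem_singleton] at hd'
            subst hd'
            have : r = q' := hr_eq_q' r hco
            subst this
            exact Finset.mem_insert_self _ _
      · have hq'miss : q' ∈ pvCells land \ (V0 ∪ T) :=
          Finset.mem_sdiff.mpr ⟨hq'c, hnotin⟩
        rw [Finset.union_insert, Finset.sdiff_insert, Finset.card_erase_of_mem hq'miss]
        have hpos : 0 < (pvCells land \ (V0 ∪ T)).card := Finset.card_pos.mpr ⟨q', hq'miss⟩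
        simp only [List.length_append, List.length_singleton]
        omega
    · -- nothing happens: the neighbour is already visited or empty
      refine ⟨T, ql, subset_rfl, ?_, le_refl _⟩
      rw [if_neg hb]
      refine ⟨hvr, hq, hnd, hqT, hp0q, hp0T, hsT, hTc, hcnt, hmn1, hmn2, hmx1, hmx2, hclo, ?_⟩
      intro d' hd' r hadj hco
      rcases List.mem_append.mp hd' with hd' | hd'
      · exact hD d' hd' r hadj hco
      · simp only [List.mem_singleton] at hd'
        subst hd'
        have hrq : r = q' := hr_eq_q' r hco
        subst hrq
        have hokr := (pvOk_of_pvAdjB land p0 q' hadj).2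
        have hval : pvGrid land nx ny ≠ 0 := by
          rw [hgridq']
          exact (pvOkB_iff_val land q' hq'c).mp hokr
        have hvis : ¬ pvGrid vis nx ny = 0 := fun h => hb ⟨h, hval⟩
        by_contra hnot
        exact hvis (hvisq'.mpr hnot)

theorem pvBfsLoop_spec (land : List (List Int))
    (s : Nat × Nat) (hok : pvOkB land s = true)
    (V0 : Finset (Nat × Nat)) (hV0 : V0 ⊆ pvCells land)
    (hdisj : ∀ q ∈ pvComp land s, q ∉ V0) :
    ∀ fuel (T : Finset (Nat × Nat)) (ql : List (Nat × Nat)) st,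
      pvInvB land V0 s T ql st →
      ql.length + 2 * ((pvCells land \ (V0 ∪ T)).card) ≤ fuel →
      ∃ vis', pvBfsLoop land (pvN land : Int) (pvM land : Int) fuel st =
          (pvMnCol land s, pvMxCol land s, pvCnt land s, vis') ∧
        pvVisRel land vis' (V0 ∪ pvComp land s) := by
  have hscell : s ∈ pvCells land := pvMem_cells_of_ok land s hok
  intro fuel
  induction fuel with
  | zero =>
    intro T ql st hinv hfuel
    obtain ⟨mn, mx, cnt, vis, q⟩ := st
    obtain ⟨hvr, hq, hnd, hqT, hsT, hTc, hcnt, hmn1, hmn2, hmx1, hmx2, hclo⟩ := hinv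
    dsimp only at hvr hq hcnt hmn1 hmn2 hmx1 hmx2
    rcases ql with _ | ⟨p0, ql'⟩
    · simp only [List.map_nil] at hq
      subst hq
      have hTcomp : T = pvComp land s :=
        pvComp_char land s hscell T V0 hsT hTc
          (fun t ht r hadj => hclo t ht (by simp) r hadj) hdisj
      refine ⟨vis, ?_, ?_⟩
      · show ((mn, mx, cnt, vis) : Int × Int × Int × List (List Int)) = _
        have hmn : mn = pvMnCol land s := by
          obtain ⟨w, hw, hwe⟩ := hmn2
          refine (fminI_unique _ _ ?_ ?_).symm
          · rw [hTcomp] at hw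
            exact Finset.mem_image.mpr ⟨w, hw, hwe.symm⟩
          · intro v hv
            obtain ⟨t, ht, hte⟩ := Finset.mem_image.mp hv
            rw [← hTcomp] at ht
            rw [← hte]
            exact hmn1 t ht
        have hmx : mx = pvMxCol land s := by
          obtain ⟨w, hw, hwe⟩ := hmx2
          refine (fmaxI_unique _ _ ?_ ?_).symm
          · rw [hTcomp] at hw
            exact Finset.mem_image.mpr ⟨w, hw, hwe.symm⟩
          · intro v hv
            obtain ⟨t, ht, hte⟩ := Finset.mem_image.mp hv
            rw [← hTcomp] at ht
            rw [← hte]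
            exact hmx1 t ht
        rw [hmn, hmx, hcnt, hTcomp]
        rfl
      · rw [← hTcomp]
        exact hvr
    · exfalso
      simp at hfuel
  | succ f ih =>
    intro T ql st hinv hfuel
    obtain ⟨mn, mx, cnt, vis, q⟩ := st
    obtain ⟨hvr, hq, hnd, hqT, hsT, hTc, hcnt, hmn1, hmn2, hmx1, hmx2, hclo⟩ := hinv
    dsimp only at hvr hq hcnt hmn1 hmn2 hmx1 hmx2
    rcases ql with _ | ⟨p0, ql'⟩
    · -- same terminal situation as fuel = 0
      simp only [List.map_nil] at hq
      subst hq
      have hTcomp : T = pvComp land s :=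
        pvComp_char land s hscell T V0 hsT hTc
          (fun t ht r hadj => hclo t ht (by simp) r hadj) hdisj
      refine ⟨vis, ?_, ?_⟩
      · show ((mn, mx, cnt, vis) : Int × Int × Int × List (List Int)) = _
        have hmn : mn = pvMnCol land s := by
          obtain ⟨w, hw, hwe⟩ := hmn2
          refine (fminI_unique _ _ ?_ ?_).symm
          · rw [hTcomp] at hw
            exact Finset.mem_image.mpr ⟨w, hw, hwe.symm⟩
          · intro v hv
            obtain ⟨t, ht, hte⟩ := Finset.mem_image.mp hv
            rw [← hTcomp] at ht
            rw [← hte]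
            exact hmn1 t ht
        have hmx : mx = pvMxCol land s := by
          obtain ⟨w, hw, hwe⟩ := hmx2
          refine (fmaxI_unique _ _ ?_ ?_).symm
          · rw [hTcomp] at hw
            exact Finset.mem_image.mpr ⟨w, hw, hwe.symm⟩
          · intro v hv
            obtain ⟨t, ht, hte⟩ := Finset.mem_image.mp hv
            rw [← hTcomp] at ht
            rw [← hte]
            exact hmx1 t ht
        rw [hmn, hmx, hcnt, hTcomp]
        rfl
      · rw [← hTcomp]
        exact hvr
    · -- pop p0 and process its four neighbours
      have hp0T : p0 ∈ T := hqT p0 List.mem_cons_self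
      have hp0ql' : p0 ∉ ql' := (List.nodup_cons.mp hnd).1
      have hmid0 : pvMidInv land V0 s p0 T ql' []
          (mn, mx, cnt, vis, List.map pvToI ql') :=
        ⟨hvr, rfl, (List.nodup_cons.mp hnd).2, fun p hp => hqT p (List.mem_cons_of_mem _ hp),
          hp0ql', hp0T, hsT, hTc, hcnt, hmn1, hmn2, hmx1, hmx2,
          fun t ht htq htp r hadj => hclo t ht (by simp [htq, htp]) r hadj,
          by simp⟩
      obtain ⟨T1, ql1, hs1, hm1, hc1⟩ := pvBfsStep_spec land V0 hV0 s p0 hok T ql' []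
        _ hmid0 (-1, 0) (by simp [pvDirs])
      obtain ⟨T2, ql2, hs2, hm2, hc2⟩ := pvBfsStep_spec land V0 hV0 s p0 hok T1 ql1 _
        _ hm1 (1, 0) (by simp [pvDirs])
      obtain ⟨T3, ql3, hs3, hm3, hc3⟩ := pvBfsStep_spec land V0 hV0 s p0 hok T2 ql2 _
        _ hm2 (0, -1) (by simp [pvDirs])
      obtain ⟨T4, ql4, hs4, hm4, hc4⟩ := pvBfsStep_spec land V0 hV0 s p0 hok T3 ql3 _
        _ hm3 (0, 1) (by simp [pvDirs])
      obtain ⟨hvr4, hq4, hnd4, hqT4, hp0q4, hp0T4, hsT4, hTc4, hcnt4, hmn14, hmn24,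
        hmx14, hmx24, hclo4, hD4⟩ := hm4
      have hinv4 : pvInvB land V0 s T4 ql4
          (pvDirs.foldl (pvBfsStep land (pvN land : Int) (pvM land : Int)
            (p0.1 : Int) (p0.2 : Int)) (mn, mx, cnt, vis, List.map pvToI ql')) := by
        refine ⟨hvr4, hq4, hnd4, hqT4, hsT4, hTc4, hcnt4, hmn14, hmn24, hmx14, hmx24, ?_⟩
        intro t ht htq r hadj
        by_cases htp : t = p0
        · subst htp
          obtain ⟨d, hdm, hco⟩ := pvAdj_cases land t r hadj
          refine hD4 d ?_ r hadj hco
          simp only [pvDirs, List.mem_cons] at hdm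
          simp only [List.mem_append, List.mem_singleton]
          rcases hdm with h | h | h | (h | h) <;> simp [h]
        · exact hclo4 t ht htq htp r hadj
      have hloop : pvBfsLoop land (pvN land : Int) (pvM land : Int) (f + 1)
          (mn, mx, cnt, vis, q) =
          pvBfsLoop land (pvN land : Int) (pvM land : Int) f
            (pvDirs.foldl (pvBfsStep land (pvN land : Int) (pvM land : Int)
              (p0.1 : Int) (p0.2 : Int)) (mn, mx, cnt, vis, List.map pvToI ql')) := by
        rw [hq]
        rfl
      rw [hloop]
      refine ih T4 ql4 _ hinv4 ?_
      have hfuel' : (p0 :: ql').length + 2 * ((pvCells land \ (V0 ∪ T)).card) ≤ f + 1 := hfuel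
      simp only [List.length_cons] at hfuel'
      omega

theorem pvBfs_spec (land : List (List Int))
    (s : Nat × Nat) (hok : pvOkB land s = true)
    (V0 : Finset (Nat × Nat)) (hV0 : V0 ⊆ pvCells land)
    (vis : List (List Int)) (hvr : pvVisRel land vis V0)
    (hdisj : ∀ q ∈ pvComp land s, q ∉ V0) :
    ∃ vis', pvBfs land (pvN land : Int) (pvM land : Int) (s.1 : Int) (s.2 : Int) vis =
        (pvMnCol land s, pvMxCol land s, pvCnt land s, vis') ∧
      pvVisRel land vis' (V0 ∪ pvComp land s) := by
  have hscell : s ∈ pvCells land := pvMem_cells_of_ok land s hok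
  have hsV0 : s ∉ V0 := hdisj s (pvMem_comp_self land s)
  have hinv : pvInvB land V0 s {s} [s]
      ((s.2 : Int), (s.2 : Int), 1, pvVisSet vis (s.1 : Int) (s.2 : Int), [pvToI s]) := by
    refine ⟨?_, by simp, List.nodup_singleton s, by simp, by simp, ?_, by simp, ?_, ?_, ?_, ?_, ?_⟩
    · show pvVisRel land (pvVisSet vis (s.1 : Int) (s.2 : Int)) (V0 ∪ {s})
      have := pvVisRel_set land vis V0 hvr s hscell
      rwa [Finset.union_comm V0 {s}, ← Finset.insert_eq]
    · intro t ht
      rw [Finset.mem_singleton] at ht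
      subst ht
      exact pvMem_comp_self land t
    · intro t ht; rw [Finset.mem_singleton] at ht; subst ht; exact le_refl _
    · exact ⟨s, Finset.mem_singleton_self s, rfl⟩
    · intro t ht; rw [Finset.mem_singleton] at ht; subst ht; exact le_refl _
    · exact ⟨s, Finset.mem_singleton_self s, rfl⟩
    · intro t ht htq
      rw [Finset.mem_singleton] at ht
      subst ht
      exact absurd (List.mem_singleton_self t) htq
  have hfuel : [s].length + 2 * ((pvCells land \ (V0 ∪ {s})).card) ≤
      2 * ((pvN land : Int).toNat * (pvM land : Int).toNat) + 1 := by
    have h1 : (pvCells land \ (V0 ∪ {s})).card ≤ (pvCells land).card :=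
      Finset.card_le_card (Finset.sdiff_subset)
    rw [pvCard_cells] at h1
    simp only [List.length_singleton, Int.toNat_natCast]
    show 1 + 2 * (pvCells land \ (V0 ∪ {s})).card ≤ 2 * (pvN land * pvM land) + 1
    have : pvN land * pvM land = pvNM land := rfl
    omega
  obtain ⟨vis', he, hrel⟩ := pvBfsLoop_spec land s hok V0 hV0 hdisj
    (2 * ((pvN land : Int).toNat * (pvM land : Int).toNat) + 1) {s} [s] _ hinv hfuel
  exact ⟨vis', he, hrel⟩

-- ---------- A: the outer scan over cells in row-major order ----------

def pvVisSetAt (land : List (List Int)) (t : Nat) : Finset (Nat × Nat) :=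
  (pvCells land).filter (fun q => ∃ p ∈ pvCells land,
    pvIdx land p < t ∧ pvOkB land p = true ∧ q ∈ pvComp land p)

def pvBody (land : List (List Int)) (st : List (List Int) × List Int) (c : Int × Int) :
    List (List Int) × List Int :=
  if pvGrid st.1 c.1 c.2 = 0 ∧ pvGrid land c.1 c.2 ≠ 0 then
    let r := pvBfs land (pvN land : Int) (pvM land : Int) c.1 c.2 st.1
    (r.2.2.2, pvAddRange st.2 r.1 r.2.1 r.2.2.1)
  else st

theorem pvVisSetAt_zero (land : List (List Int)) : pvVisSetAt land 0 = ∅ := by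
  ext q
  simp [pvVisSetAt]

theorem pvVisSetAt_subset (land : List (List Int)) (t : Nat) :
    pvVisSetAt land t ⊆ pvCells land := Finset.filter_subset _ _

theorem pvVisSetAt_succ_ok (land : List (List Int)) (t : Nat) (ht : t < pvNM land)
    (hok : pvOkB land (pvCellF land t) = true) :
    pvVisSetAt land (t + 1) = pvVisSetAt land t ∪ pvComp land (pvCellF land t) := by
  have hccell := pvCellF_mem_cells land t ht
  ext q
  simp only [pvVisSetAt, Finset.mem_union, Finset.mem_filter]
  constructor
  · rintro ⟨hqc, p, hpc, hpt, hpok, hqp⟩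
    rcases Nat.lt_succ_iff_lt_or_eq.mp hpt with hpt | hpt
    · exact Or.inl ⟨hqc, p, hpc, hpt, hpok, hqp⟩
    · have hpe : p = pvCellF land t := by rw [← pvCellF_idx land p hpc, hpt]
      subst hpe
      exact Or.inr hqp
  · rintro (⟨hqc, p, hpc, hpt, hpok, hqp⟩ | hq)
    · exact ⟨hqc, p, hpc, Nat.lt_succ_of_lt hpt, hpok, hqp⟩
    · refine ⟨pvBall_subset_cells land _ hccell _ hq, pvCellF land t, hccell, ?_, hok, hq⟩
      rw [pvIdx_cellF]
      omega

theorem pvVisSetAt_succ_nok (land : List (List Int)) (t : Nat)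
    (hok : pvOkB land (pvCellF land t) = false) :
    pvVisSetAt land (t + 1) = pvVisSetAt land t := by
  ext q
  simp only [pvVisSetAt, Finset.mem_filter]
  constructor
  · rintro ⟨hqc, p, hpc, hpt, hpok, hqp⟩
    rcases Nat.lt_succ_iff_lt_or_eq.mp hpt with hpt | hpt
    · exact ⟨hqc, p, hpc, hpt, hpok, hqp⟩
    · have hpe : p = pvCellF land t := by rw [← pvCellF_idx land p hpc, hpt]
      rw [hpe] at hpok
      rw [hpok] at hok
      exact absurd hok (by simp)
  · rintro ⟨hqc, p, hpc, hpt, hpok, hqp⟩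
    exact ⟨hqc, p, hpc, Nat.lt_succ_of_lt hpt, hpok, hqp⟩

theorem pvDisjAt (land : List (List Int)) (t : Nat) (c : Nat × Nat)
    (hc : c ∈ pvCells land) (hnv : c ∉ pvVisSetAt land t) :
    ∀ q ∈ pvComp land c, q ∉ pvVisSetAt land t := by
  intro q hq hqv
  simp only [pvVisSetAt, Finset.mem_filter] at hqv
  obtain ⟨hqc, p, hpc, hpt, hpok, hqp⟩ := hqv
  have h1 : pvComp land q = pvComp land c := pvComp_eq_of_mem land c q hc hq
  have h2 : pvComp land q = pvComp land p := pvComp_eq_of_mem land p q hpc hqp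
  apply hnv
  simp only [pvVisSetAt, Finset.mem_filter]
  refine ⟨hc, p, hpc, hpt, hpok, ?_⟩
  rw [← h2, h1]
  exact pvMem_comp_self land c

theorem pvRep_true (land : List (List Int)) (t : Nat) (ht : t < pvNM land)
    (hok : pvOkB land (pvCellF land t) = true)
    (hnv : pvCellF land t ∉ pvVisSetAt land t) :
    pvRepB land (pvCellF land t) = true := by
  have hccell := pvCellF_mem_cells land t ht
  simp only [pvRepB, hok, Bool.true_and, decide_eq_true_eq]
  intro q hq
  by_contra hlt
  push Not at hlt
  rw [pvIdx_cellF] at hlt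
  have hqok : pvOkB land q = true := pvOk_of_mem_comp land _ hok q hq
  have hqc : q ∈ pvCells land := pvMem_cells_of_ok land q hqok
  apply hnv
  simp only [pvVisSetAt, Finset.mem_filter]
  exact ⟨hccell, q, hqc, hlt, hqok,
    pvBall_symm land (pvNM land) (pvCellF land t) q hq⟩

theorem pvRep_false_visited (land : List (List Int)) (t : Nat) (ht : t < pvNM land)
    (hv : pvCellF land t ∈ pvVisSetAt land t) :
    pvRepB land (pvCellF land t) = false := by
  have hccell := pvCellF_mem_cells land t ht
  simp only [pvVisSetAt, Finset.mem_filter] at hv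
  obtain ⟨-, p, hpc, hpt, hpok, hcp⟩ := hv
  simp only [pvRepB, Bool.and_eq_false_iff, decide_eq_false_iff_not]
  right
  push Not
  refine ⟨p, ?_, ?_⟩
  · exact pvBall_symm land _ _ _ hcp
  · rw [pvIdx_cellF]
    omega

theorem pvRep_false_nok (land : List (List Int)) (c : Nat × Nat)
    (hok : pvOkB land c = false) : pvRepB land c = false := by
  simp [pvRepB, hok]

-- row-major flattening of the two nested loops
theorem pvFlattenRanges {α : Type} (n m : Nat) (g : Nat → Nat → α) :
    (List.range n).flatMap (fun x => (List.range m).map (fun y => g x y)) =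
      (List.range (n * m)).map (fun t => g (t / m) (t % m)) := by
  induction n with
  | zero => simp
  | succ n ih =>
    rw [List.range_succ, List.flatMap_append, ih, Nat.succ_mul, List.range_add,
      List.map_append]
    congr 1
    simp only [List.flatMap_cons, List.flatMap_nil, List.append_nil, List.map_map]
    apply List.map_congr_left
    intro y hy
    rw [List.mem_range] at hy
    have h1 : (n * m + y) / m = n := by
      rw [Nat.mul_comm, Nat.mul_add_div (by omega), Nat.div_eq_of_lt hy, Nat.add_zero]
    have h2 : (n * m + y) % m = y := by
      rw [Nat.mul_comm, Nat.mul_add_mod, Nat.mod_eq_of_lt hy]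
    simp [h1, h2]

theorem pvPyRangeNat (k : Nat) :
    PySem.List.pyRange 0 (k : Int) 1 = (List.range k).map (fun j : Nat => (j : Int)) := by
  rw [PySem.List.pyRange_one]
  simp

theorem pvOuter (land : List (List Int)) :
    ∀ (k t : Nat), t + k = pvNM land → ∀ (vis : List (List Int)) (oil : List Int),
      pvVisRel land vis (pvVisSetAt land t) →
      ∃ vis'',
        ((List.range' t k).map (fun i => pvToI (pvCellF land i))).foldl (pvBody land)
            (vis, oil) =
          (vis'', (((List.range' t k).map (pvCellF land)).filter (pvRepB land)).foldl
            (fun oil p => pvAddRange oil (pvMnCol land p) (pvMxCol land p) (pvCnt land p))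
            oil) := by
  intro k
  induction k with
  | zero => intro t _ vis oil _; exact ⟨vis, rfl⟩
  | succ k ih =>
    intro t hk vis oil hvr
    have ht : t < pvNM land := by omega
    have hccell := pvCellF_mem_cells land t ht
    set c := pvCellF land t with hc
    rw [List.range'_succ, List.map_cons, List.map_cons, List.foldl_cons, List.filter_cons]
    have hvget : pvGrid vis (c.1 : Int) (c.2 : Int) = 0 ↔ c ∉ pvVisSetAt land t :=
      pvVisRel_get land vis _ hvr c hccell
    have hbody : pvBody land (vis, oil) (pvToI c) =
        if pvGrid vis (c.1 : Int) (c.2 : Int) = 0 ∧ pvGrid land (c.1 : Int) (c.2 : Int) ≠ 0 then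
          (let r := pvBfs land (pvN land : Int) (pvM land : Int) (c.1 : Int) (c.2 : Int) vis
           (r.2.2.2, pvAddRange oil r.1 r.2.1 r.2.2.1))
        else (vis, oil) := rfl
    by_cases hok : pvOkB land c = true
    · by_cases hvis : c ∈ pvVisSetAt land t
      · -- already swallowed by an earlier component
        have hcond : ¬ (pvGrid vis (c.1 : Int) (c.2 : Int) = 0 ∧
            pvGrid land (c.1 : Int) (c.2 : Int) ≠ 0) := by
          rintro ⟨h0, -⟩
          exact (hvget.mp h0) hvis
        rw [hbody, if_neg hcond]
        have hrep : pvRepB land c = false := pvRep_false_visited land t ht (hc ▸ hvis)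
        rw [hrep]
        simp only [Bool.false_eq_true, if_false]
        have hnext : pvVisSetAt land (t + 1) = pvVisSetAt land t := by
          rw [pvVisSetAt_succ_ok land t ht (hc ▸ hok)]
          have hsub : pvComp land c ⊆ pvVisSetAt land t := by
            intro q hq
            simp only [pvVisSetAt, Finset.mem_filter] at hvis ⊢
            obtain ⟨hcc, p, hpc, hpt, hpok, hcp⟩ := hvis
            refine ⟨pvBall_subset_cells land c hccell _ hq, p, hpc, hpt, hpok, ?_⟩
            rw [← pvComp_eq_of_mem land p c hpc hcp]
            exact hq
          rw [Finset.union_eq_left.mpr hsub]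
        exact ih (t + 1) (by omega) vis oil (by rw [hnext]; exact hvr)
      · -- fresh component: A runs its BFS here
        have hval : pvVal land c ≠ 0 := (pvOkB_iff_val land c hccell).mp hok
        have hcond : pvGrid vis (c.1 : Int) (c.2 : Int) = 0 ∧
            pvGrid land (c.1 : Int) (c.2 : Int) ≠ 0 := by
          refine ⟨hvget.mpr hvis, ?_⟩
          rw [pvGrid_natCast]
          exact hval
        rw [hbody, if_pos hcond]
        obtain ⟨vis', hbfs, hvr'⟩ := pvBfs_spec land c hok (pvVisSetAt land t)
          (pvVisSetAt_subset land t) vis hvr (pvDisjAt land t c hccell hvis)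
        rw [hbfs]
        have hrep : pvRepB land c = true := pvRep_true land t ht (hc ▸ hok) (hc ▸ hvis)
        rw [hrep, if_pos rfl]
        have hnext : pvVisSetAt land (t + 1) =
            pvVisSetAt land t ∪ pvComp land c := pvVisSetAt_succ_ok land t ht (hc ▸ hok)
        exact ih (t + 1) (by omega) vis' (pvAddRange oil (pvMnCol land c) (pvMxCol land c)
          (pvCnt land c)) (by rw [hnext]; exact hvr')
    · -- empty cell: nothing happens
      have hval : pvVal land c = 0 := by
        by_contra hne
        exact hok ((pvOkB_iff_val land c hccell).mpr hne)
      have hcond : ¬ (pvGrid vis (c.1 : Int) (c.2 : Int) = 0 ∧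
          pvGrid land (c.1 : Int) (c.2 : Int) ≠ 0) := by
        rintro ⟨-, hg⟩
        rw [pvGrid_natCast] at hg
        exact hg hval
      rw [hbody, if_neg hcond]
      have hrep : pvRepB land c = false :=
        pvRep_false_nok land c (Bool.not_eq_true _ ▸ Bool.of_not_eq_true hok)
      rw [hrep]
      simp only [Bool.false_eq_true, if_false]
      have hnext : pvVisSetAt land (t + 1) = pvVisSetAt land t :=
        pvVisSetAt_succ_nok land t (hc ▸ Bool.of_not_eq_true hok)
      exact ih (t + 1) (by omega) vis oil (by rw [hnext]; exact hvr)

theorem pvFoldFuse {α : Type} (l1 l2 : List Int) (G : α → Int × Int → α) (init : α) :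
    l1.foldl (fun st x => l2.foldl (fun st y => G st (x, y)) st) init =
      (l1.flatMap (fun x => l2.map (fun y => (x, y)))).foldl G init := by
  rw [List.foldl_flatMap]
  simp only [List.foldl_map]

theorem pvPairsList (land : List (List Int)) :
    (PySem.List.pyRange 0 (pvN land : Int) 1).flatMap
      (fun x => (PySem.List.pyRange 0 (pvM land : Int) 1).map (fun y => (x, y))) =
    (List.range' 0 (pvNM land)).map (fun i => pvToI (pvCellF land i)) := by
  rw [pvPyRangeNat, pvPyRangeNat, List.flatMap_map]
  have h1 : (fun (x : Nat) => (List.range (pvM land)).map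
        (fun j : Nat => (j : Int)) |>.map (fun y => ((x : Int), y))) =
      (fun (x : Nat) => (List.range (pvM land)).map
        (fun y : Nat => (((x : Int), (y : Int)) : Int × Int))) := by
    funext x
    rw [List.map_map]
    rfl
  rw [h1, pvFlattenRanges (pvN land) (pvM land) (fun x y => (((x : Int), (y : Int)) : Int × Int))]
  rw [← List.range_eq_range']
  rfl

theorem pvA_eq (land : List (List Int)) (hpre : Pre_solution land) :
    solution land = pvResult land := by
  obtain ⟨hne, hmpos, hrows⟩ := hpre
  have hget0 : PySem.List.pyGetD land 0 [] = land.headD [] := by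
    rcases land with _ | ⟨r0, rest⟩
    · simp at hne
    · simp
  have h0 : solution land =
      (PySem.List.max?
        (((PySem.List.pyRange 0 (pvN land : Int) 1).foldl
            (fun st x => (PySem.List.pyRange 0 (pvM land : Int) 1).foldl
              (fun st y => pvBody land st (x, y)) st)
            ((PySem.List.pyRange 0 (pvN land : Int) 1).map
              (fun _ => (PySem.List.pyRange 0 (pvM land : Int) 1).map (fun _ => (0 : Int))),
             pvOil0 land)).2)
        (fun v => v)).getD 0 := by
    simp only [solution, PySem.List.len_eq, hget0]
    rfl
  rw [pvFoldFuse, pvPairsList] at h0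
  obtain ⟨vis'', houter⟩ := pvOuter land (pvNM land) 0 (Nat.zero_add _)
    ((PySem.List.pyRange 0 (pvN land : Int) 1).map
      (fun _ => (PySem.List.pyRange 0 (pvM land : Int) 1).map (fun _ => (0 : Int))))
    (pvOil0 land)
    (by rw [pvVisSetAt_zero]; exact pvVisRel_init land)
  rw [houter] at h0
  rw [h0]
  show (PySem.List.max? ((((List.range' 0 (pvNM land)).map (pvCellF land)).filter
      (pvRepB land)).foldl _ _) _).getD 0 = _
  rw [← List.range_eq_range']
  rfl

-- ---------- B: labels ----------

def pvNearB (p q : Nat × Nat) : Bool :=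
  (p.1 == q.1 && (p.2 + 1 == q.2 || q.2 + 1 == p.2)) ||
    (p.2 == q.2 && (p.1 + 1 == q.1 || q.1 + 1 == p.1))

theorem pvAdjB_eq (land : List (List Int)) (p q : Nat × Nat) :
    pvAdjB land p q = (pvOkB land p && pvOkB land q && pvNearB p q) := rfl

theorem pvCellF_eq (land : List (List Int)) (a b : Nat) (hb : b < pvM land) :
    pvCellF land (a * pvM land + b) = (a, b) := by
  simp only [pvCellF]
  have hm : 0 < pvM land := Nat.lt_of_le_of_lt (Nat.zero_le _) hb
  have h1 : (a * pvM land + b) / pvM land = a := by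
    rw [Nat.mul_comm, Nat.mul_add_div hm, Nat.div_eq_of_lt hb, Nat.add_zero]
  have h2 : (a * pvM land + b) % pvM land = b := by
    rw [Nat.mul_comm, Nat.mul_add_mod, Nat.mod_eq_of_lt hb]
  rw [h1, h2]

theorem pvMem_nbrs (land : List (List Int)) (i : Nat) (hi : i < pvNM land) (j : Int) :
    j ∈ pvNbrs (pvN land : Int) (pvM land : Int) (i : Int) ↔
      ∃ jn : Nat, j = (jn : Int) ∧ jn < pvNM land ∧
        pvNearB (pvCellF land i) (pvCellF land jn) = true := by
  have hi' : i < pvN land * pvM land := hi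
  have hm : 0 < pvM land := by
    by_contra hm
    have h0 : pvM land = 0 := by omega
    rw [h0] at hi'
    omega
  have hn : 0 < pvN land := by
    by_contra hn
    have h0 : pvN land = 0 := by omega
    rw [h0] at hi'
    omega
  set d := i / pvM land with hd
  set r := i % pvM land with hr
  have hdr : i = d * pvM land + r := by
    rw [hd, hr, Nat.mul_comm]
    exact (Nat.div_add_mod i (pvM land)).symm
  have hrm : r < pvM land := Nat.mod_lt _ hm
  have hdn : d < pvN land := by
    rw [hd]
    exact Nat.div_lt_of_lt_mul (by rwa [Nat.mul_comm] at hi')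
  have hcf : pvCellF land i = (d, r) := by rw [hdr]; exact pvCellF_eq land d r hrm
  constructor
  · intro hj
    simp only [pvNbrs, PySem.Int.floordiv_natCast, PySem.Int.mod_natCast,
      List.mem_append] at hj
    rcases hj with ((hj | hj) | hj) | hj
    · rw [← hd] at hj
      by_cases h0 : 0 < d
      · rw [if_pos (by exact_mod_cast h0)] at hj
        simp only [List.mem_singleton] at hj
        have him : pvM land ≤ i := by
          calc pvM land = 1 * pvM land := (Nat.one_mul _).symm
          _ ≤ d * pvM land := Nat.mul_le_mul_right _ h0
          _ ≤ i := by omega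
        have hsub : i - pvM land = (d - 1) * pvM land + r := by
          have he : (d - 1) * pvM land + pvM land = d * pvM land := by
            rw [Nat.sub_one_mul]
            have : pvM land ≤ d * pvM land := by
              calc pvM land = 1 * pvM land := (Nat.one_mul _).symm
              _ ≤ d * pvM land := Nat.mul_le_mul_right _ h0
            omega
          omega
        refine ⟨i - pvM land, by omega, Nat.lt_of_le_of_lt (Nat.sub_le _ _) hi, ?_⟩
        rw [hsub, pvCellF_eq land _ r hrm, hcf]
        simp [pvNearB]
        omega
      · rw [if_neg (by exact_mod_cast h0)] at hj
        simp at hj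
    · rw [← hd] at hj
      by_cases h0 : d + 1 < pvN land
      · rw [if_pos (by exact_mod_cast h0)] at hj
        simp only [List.mem_singleton] at hj
        have hadd : i + pvM land = (d + 1) * pvM land + r := by
          rw [hdr]; ring
        refine ⟨i + pvM land, by rw [hj]; push_cast; ring, ?_, ?_⟩
        · have hcalc : i + pvM land < pvN land * pvM land := by
            rw [hadd]
            calc (d + 1) * pvM land + r < (d + 1) * pvM land + pvM land := by omega
            _ = (d + 2) * pvM land := by ring
            _ ≤ pvN land * pvM land := Nat.mul_le_mul_right _ (by omega)
          exact hcalc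
        · rw [hadd, pvCellF_eq land _ r hrm, hcf]
          simp [pvNearB]
      · rw [if_neg (by exact_mod_cast h0)] at hj
        simp at hj
    · rw [← hr] at hj
      by_cases h0 : 0 < r
      · rw [if_pos (by exact_mod_cast h0)] at hj
        simp only [List.mem_singleton] at hj
        have hsub : i - 1 = d * pvM land + (r - 1) := by omega
        refine ⟨i - 1, by omega, Nat.lt_of_le_of_lt (Nat.sub_le _ _) hi, ?_⟩
        rw [hsub, pvCellF_eq land d _ (by omega), hcf]
        simp [pvNearB]
        omega
      · rw [if_neg (by exact_mod_cast h0)] at hj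
        simp at hj
    · rw [← hr] at hj
      by_cases h0 : r + 1 < pvM land
      · rw [if_pos (by exact_mod_cast h0)] at hj
        simp only [List.mem_singleton] at hj
        have hadd : i + 1 = d * pvM land + (r + 1) := by omega
        refine ⟨i + 1, by rw [hj]; push_cast; ring, ?_, ?_⟩
        · have hcalc : i + 1 < pvN land * pvM land := by
            have h1 : d * pvM land + (r + 1) < (d + 1) * pvM land := by
              have he : (d + 1) * pvM land = d * pvM land + pvM land := by ring
              omega
            have h2 : (d + 1) * pvM land ≤ pvN land * pvM land :=
              Nat.mul_le_mul_right _ (by omega)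
            omega
          exact hcalc
        · rw [hadd, pvCellF_eq land d _ h0, hcf]
          simp [pvNearB]
      · rw [if_neg (by exact_mod_cast h0)] at hj
        simp at hj
  · rintro ⟨jn, rfl, hjn, hnear⟩
    have hjn' : jn < pvN land * pvM land := hjn
    obtain ⟨d', r', hdr', hrm'⟩ : ∃ d' r', jn = d' * pvM land + r' ∧ r' < pvM land :=
      ⟨jn / pvM land, jn % pvM land,
        by rw [Nat.mul_comm]; exact (Nat.div_add_mod jn (pvM land)).symm,
        Nat.mod_lt _ hm⟩
    have hcf' : pvCellF land jn = (d', r') := by rw [hdr']; exact pvCellF_eq land d' r' hrm'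
    have hd'n : d' < pvN land := by
      by_contra hge
      push Not at hge
      have : pvN land * pvM land ≤ d' * pvM land := Nat.mul_le_mul_right _ hge
      omega
    rw [hcf, hcf'] at hnear
    simp only [pvNearB, Bool.or_eq_true, Bool.and_eq_true, beq_iff_eq] at hnear
    simp only [pvNbrs, PySem.Int.floordiv_natCast, PySem.Int.mod_natCast, ← hd, ← hr,
      List.mem_append]
    rcases hnear with ⟨he, hx | hx⟩ | ⟨he, hx | hx⟩
    · -- same row, jn = i + 1
      have hji : jn = i + 1 := by
        rw [hdr', hdr, he]
        omega
      refine Or.inr ?_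
      rw [if_pos (by exact_mod_cast (show r + 1 < pvM land by omega))]
      simp only [List.mem_singleton]
      omega
    · -- same row, jn = i - 1
      have hji : jn + 1 = i := by
        rw [hdr', hdr, he]
        omega
      refine Or.inl (Or.inr ?_)
      rw [if_pos (by exact_mod_cast (show 0 < r by omega))]
      simp only [List.mem_singleton]
      omega
    · -- same column, jn = i + m
      have hmul : (d + 1) * pvM land = d * pvM land + pvM land := by ring
      have hji : jn = i + pvM land := by
        rw [hdr', hdr, ← hx, hmul]
        omega
      refine Or.inl (Or.inl (Or.inr ?_))
      rw [if_pos (by exact_mod_cast (show d + 1 < pvN land by omega))]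
      simp only [List.mem_singleton]
      omega
    · -- same column, jn = i - m
      have hmul : (d' + 1) * pvM land = d' * pvM land + pvM land := by ring
      have hji : jn + pvM land = i := by
        rw [hdr', hdr, ← hx, hmul]
        omega
      refine Or.inl (Or.inl (Or.inl ?_))
      rw [if_pos (by exact_mod_cast (show 0 < d by omega))]
      simp only [List.mem_singleton]
      omega

theorem pvMem_ball_succ_first (land : List (List Int)) (p : Nat × Nat) (k : Nat)
    (q : Nat × Nat) :
    q ∈ pvBall land p (k + 1) ↔
      q ∈ pvBall land p k ∨ ∃ w, pvAdjB land p w = true ∧ q ∈ pvBall land w k := by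
  constructor
  · intro h
    rw [pvBall_succ_inner] at h
    obtain ⟨w, hw, hq⟩ := pvMem_iterate_exists land k _ q h
    rcases (pvMem_expand land _ w).mp hw with hw | ⟨p', hp', ha⟩
    · rw [Finset.mem_singleton] at hw
      subst hw
      exact Or.inl hq
    · rw [Finset.mem_singleton] at hp'
      subst hp'
      exact Or.inr ⟨w, ha, hq⟩
  · rintro (h | ⟨w, ha, hq⟩)
    · exact pvBall_mono land p (Nat.le_succ k) h
    · have hw1 : w ∈ pvBall land p 1 := by
        rw [pvBall_succ, pvBall_zero]
        exact (pvMem_expand land _ w).mpr (Or.inr ⟨p, Finset.mem_singleton_self p, ha⟩)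
      have := pvBall_trans land p w 1 k hw1 hq
      rwa [Nat.add_comm] at this

def pvLab0 (land : List (List Int)) : List Int :=
  ((PySem.List.pyRange 0 (pvN land : Int) 1).map (fun x =>
    (PySem.List.pyRange 0 (pvM land : Int) 1).map (fun y =>
      if pvGrid land x y ≠ 0 then x * (pvM land : Int) + y else -1))).flatten

def pvSweepF (land : List (List Int)) (lab : List Int) : List Int :=
  pvSweep (pvN land : Int) (pvM land : Int) ((pvN land : Int) * (pvM land : Int)) lab

def pvLabAt (land : List (List Int)) (k : Nat) : List Int :=
  (pvSweepF land)^[k] (pvLab0 land)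

def pvLabF (land : List (List Int)) : List Int := pvLabAt land (pvNM land)

def pvLabInv (land : List (List Int)) (k : Nat) (lab : List Int) : Prop :=
  lab.length = pvNM land ∧
  ∀ i, i < pvNM land →
    (pvOkB land (pvCellF land i) = true →
      (∀ q ∈ pvBall land (pvCellF land i) k, lab.getD i 0 ≤ (pvIdx land q : Int)) ∧
      (∃ q ∈ pvBall land (pvCellF land i) k, lab.getD i 0 = (pvIdx land q : Int))) ∧
    (pvOkB land (pvCellF land i) = false → lab.getD i 0 = -1)

theorem pvGetD_map_range (f : Nat → Int) (N i : Nat) (h : i < N) :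
    ((List.range N).map f).getD i 0 = f i := by
  rw [List.getD_eq_getElem _ 0 (by simp [h]), List.getElem_map, List.getElem_range]

theorem pvLab0_eq (land : List (List Int)) :
    pvLab0 land = (List.range (pvNM land)).map
      (fun t : Nat => if pvVal land (pvCellF land t) ≠ 0 then (t : Int) else -1) := by
  rw [pvLab0, pvPyRangeNat, pvPyRangeNat, List.map_map, ← List.flatMap_def]
  have h1 : ∀ xn : Nat,
      ((fun x : Int => (List.map (fun j : Nat => (j : Int)) (List.range (pvM land))).map
        (fun y => if pvGrid land x y ≠ 0 then x * (pvM land : Int) + y else -1)) ∘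
        (fun j : Nat => (j : Int))) xn =
      (List.range (pvM land)).map (fun yn : Nat =>
        if pvVal land (xn, yn) ≠ 0 then ((xn * pvM land + yn : Nat) : Int) else -1) := by
    intro xn
    simp only [Function.comp_apply, List.map_map]
    apply List.map_congr_left
    intro yn _
    simp only [Function.comp_apply, pvGrid_natCast]
    have : ((xn * pvM land + yn : Nat) : Int) = (xn : Int) * (pvM land : Int) + yn := by
      push_cast; ring
    rw [this]
    rfl
  rw [funext h1, pvFlattenRanges (pvN land) (pvM land)
    (fun x y => if pvVal land (x, y) ≠ 0 then ((x * pvM land + y : Nat) : Int) else -1)]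
  apply List.map_congr_left
  intro t ht
  rw [List.mem_range] at ht
  have he : (t / pvM land) * pvM land + t % pvM land = t := pvIdx_cellF land t
  rw [he]
  rfl

theorem pvLabInv_zero (land : List (List Int)) : pvLabInv land 0 (pvLab0 land) := by
  rw [pvLab0_eq]
  constructor
  · simp
  · intro i hi
    have hc := pvCellF_mem_cells land i hi
    rw [pvGetD_map_range _ _ _ hi]
    constructor
    · intro hok
      have hval : pvVal land (pvCellF land i) ≠ 0 := (pvOkB_iff_val land _ hc).mp hok
      rw [if_pos hval]
      rw [pvBall_zero]
      refine ⟨?_, pvCellF land i, Finset.mem_singleton_self _, ?_⟩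
      · intro q hq
        rw [Finset.mem_singleton] at hq
        subst hq
        rw [pvIdx_cellF]
      · rw [pvIdx_cellF]
    · intro hok
      have hval : ¬ pvVal land (pvCellF land i) ≠ 0 := by
        intro hne
        rw [(pvOkB_iff_val land _ hc).mpr hne] at hok
        exact absurd hok (by simp)
      rw [if_neg hval]

theorem pvLabInv_step (land : List (List Int)) (k : Nat) (lab : List Int)
    (hinv : pvLabInv land k lab) : pvLabInv land (k + 1) (pvSweepF land lab) := by
  obtain ⟨hlen, hchar⟩ := hinv
  have hsw : pvSweepF land lab = (List.range (pvNM land)).map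
      (fun t : Nat => (fun i : Int =>
        let li := PySem.List.pyGetD lab i 0
        if li < 0 then li
        else
          (PySem.List.min?
            (li :: ((pvNbrs (pvN land : Int) (pvM land : Int) i).filter
              (fun j => 0 ≤ PySem.List.pyGetD lab j 0)).map
              (fun j => PySem.List.pyGetD lab j 0))
            (fun v => v)).getD 0) (t : Int)) := by
    rw [pvSweepF, pvSweep, ← Nat.cast_mul, pvPyRangeNat, List.map_map]
    rfl
  constructor
  · rw [hsw]; simp
  · intro i hi
    have hc := pvCellF_mem_cells land i hi
    rw [hsw, pvGetD_map_range _ _ _ hi]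
    simp only [PySem.List.pyGetD_natCast]
    have hgetd : lab.getD (i : Nat) 0 = lab.getD i 0 := rfl
    constructor
    · intro hok
      obtain ⟨hub, q0, hq0, hq0e⟩ := (hchar i hi).1 hok
      have hnneg : ¬ (lab.getD i 0 < 0) := by
        rw [hq0e]
        simp
      rw [if_neg (by simpa using hnneg)]
      -- the element list whose min is taken
      set vals := ((pvNbrs (pvN land : Int) (pvM land : Int) (i : Int)).filter
          (fun j => 0 ≤ PySem.List.pyGetD lab j 0)).map
          (fun j => PySem.List.pyGetD lab j 0) with hvals
      have hne : (lab.getD i 0 :: vals) ≠ [] := by simp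
      obtain ⟨mm, hmm⟩ : ∃ mm, PySem.List.min? (lab.getD i 0 :: vals) (fun v => v) = some mm := by
        rcases h : PySem.List.min? (lab.getD i 0 :: vals) (fun v => v) with _ | mm
        · rw [PySem.List.min?_eq_none_iff] at h
          exact absurd h hne
        · exact ⟨mm, rfl⟩
      have hmem := PySem.List.min?_mem hmm
      have hmin := PySem.List.min?_isMin hmm
      rw [hmm]
      simp only [Option.getD_some]
      constructor
      · intro q hq
        rcases (pvMem_ball_succ_first land _ k q).mp hq with hq | ⟨w, hadj, hq⟩
        · calc mm ≤ lab.getD i 0 := hmin _ (List.mem_cons_self)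
          _ ≤ (pvIdx land q : Int) := hub q hq
        · have hokw : pvOkB land w = true := (pvOk_of_pvAdjB land _ w hadj).2
          have hwc : w ∈ pvCells land := pvMem_cells_of_ok land w hokw
          have hjw : pvIdx land w < pvNM land := pvIdx_lt_NM land w hwc
          obtain ⟨hubw, qw, hqw, hqwe⟩ := (hchar (pvIdx land w) hjw).1
            (by rwa [pvCellF_idx land w hwc])
          have hnear : pvNearB (pvCellF land i) (pvCellF land (pvIdx land w)) = true := by
            rw [pvCellF_idx land w hwc]
            have := hadj
            rw [pvAdjB_eq] at this
            simp only [Bool.and_eq_true] at this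
            exact this.2
          have hmemn : ((pvIdx land w : Nat) : Int) ∈
              pvNbrs (pvN land : Int) (pvM land : Int) (i : Int) :=
            (pvMem_nbrs land i hi _).mpr ⟨pvIdx land w, rfl, hjw, hnear⟩
          have hlabw : lab.getD (pvIdx land w) 0 = (pvIdx land qw : Int) := hqwe
          have hfil : ((pvIdx land w : Nat) : Int) ∈
              (pvNbrs (pvN land : Int) (pvM land : Int) (i : Int)).filter
                (fun j => 0 ≤ PySem.List.pyGetD lab j 0) := by
            rw [List.mem_filter]
            refine ⟨hmemn, ?_⟩
            simp only [PySem.List.pyGetD_natCast, decide_eq_true_eq]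
            rw [hlabw]
            positivity
          have hval : lab.getD (pvIdx land w) 0 ∈ vals := by
            rw [hvals]
            exact List.mem_map.mpr ⟨_, hfil, by simp⟩
          calc mm ≤ lab.getD (pvIdx land w) 0 := hmin _ (List.mem_cons_of_mem _ hval)
          _ ≤ (pvIdx land q : Int) := by
              rw [pvCellF_idx land w hwc] at hubw
              exact hubw q hq
      · rcases List.mem_cons.mp hmem with hmm' | hmm'
        · refine ⟨q0, pvBall_mono land _ (Nat.le_succ k) hq0, by rw [hmm', hq0e]⟩
        · rw [hvals] at hmm'
          obtain ⟨j, hjf, hje⟩ := List.mem_map.mp hmm'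
          rw [List.mem_filter] at hjf
          obtain ⟨hjn, hjpos⟩ := hjf
          obtain ⟨jn, rfl, hjnm, hnear⟩ := (pvMem_nbrs land i hi j).mp hjn
          simp only [PySem.List.pyGetD_natCast, decide_eq_true_eq] at hjpos hje
          have hw := pvCellF land jn
          by_cases hokw : pvOkB land (pvCellF land jn) = true
          · obtain ⟨hubw, qw, hqw, hqwe⟩ := (hchar jn hjnm).1 hokw
            have hadj : pvAdjB land (pvCellF land i) (pvCellF land jn) = true := by
              rw [pvAdjB_eq]
              simp [hok, hokw, hnear]
            refine ⟨qw, ?_, by rw [← hje, hqwe]⟩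
            exact (pvMem_ball_succ_first land _ k qw).mpr
              (Or.inr ⟨pvCellF land jn, hadj, hqw⟩)
          · have : lab.getD jn 0 = -1 := (hchar jn hjnm).2 (Bool.of_not_eq_true hokw)
            rw [this] at hjpos
            omega
    · intro hok
      have hm1 : lab.getD i 0 = -1 := (hchar i hi).2 hok
      rw [hgetd, hm1]
      simp

theorem pvLabF_inv (land : List (List Int)) : pvLabInv land (pvNM land) (pvLabF land) := by
  have : ∀ k, pvLabInv land k (pvLabAt land k) := by
    intro k
    induction k with
    | zero => exact pvLabInv_zero land
    | succ k ih =>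
      rw [pvLabAt, Function.iterate_succ_apply']
      exact pvLabInv_step land k _ ih
  exact this (pvNM land)

-- ---------- B: grouping by final label ----------

def pvPart (land : List (List Int)) (p : Nat × Nat) (t : Nat) : Finset (Nat × Nat) :=
  (pvComp land p).filter (fun q => pvIdx land q < t)

def pvEntry (land : List (List Int)) (t : Nat) (p : Nat × Nat) :
    Int × (Int × Int × Int) :=
  ((pvIdx land p : Int), (((pvPart land p t).card : Int),
    fminI (pvColsI (pvPart land p t)), fmaxI (pvColsI (pvPart land p t))))

def pvAggF (land : List (List Int)) (lab : List Int)
    (agg : PySem.Dict Int (Int × Int × Int)) (i : Int) : PySem.Dict Int (Int × Int × Int) :=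
  let L := PySem.List.pyGetD lab i 0
  if L < 0 then agg
  else
    let y := PySem.Int.mod i (pvM land : Int)
    match PySem.Dict.get? agg L with
    | some (c, mn, mx) => PySem.Dict.insert agg L (c + 1, min mn y, max mx y)
    | none => PySem.Dict.insert agg L (1, y, y)

theorem fminI_singleton (v : Int) : fminI {v} = v := by
  refine fminI_unique _ v (Finset.mem_singleton_self v) ?_
  intro w hw
  rw [Finset.mem_singleton] at hw
  omega

theorem fmaxI_singleton (v : Int) : fmaxI {v} = v := by
  refine fmaxI_unique _ v (Finset.mem_singleton_self v) ?_
  intro w hw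
  rw [Finset.mem_singleton] at hw
  omega

theorem fminI_insert (S : Finset Int) (hS : S.Nonempty) (v : Int) :
    fminI (insert v S) = min (fminI S) v := by
  obtain ⟨hmem, hle⟩ := fminI_spec S hS
  refine fminI_unique _ _ ?_ ?_
  · rcases le_total (fminI S) v with h | h
    · rw [min_eq_left h]; exact Finset.mem_insert_of_mem hmem
    · rw [min_eq_right h]; exact Finset.mem_insert_self _ _
  · intro w hw
    rcases Finset.mem_insert.mp hw with rfl | hw
    · exact min_le_right _ _
    · exact le_trans (min_le_left _ _) (hle w hw)

theorem fmaxI_insert (S : Finset Int) (hS : S.Nonempty) (v : Int) :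
    fmaxI (insert v S) = max (fmaxI S) v := by
  obtain ⟨hmem, hle⟩ := fmaxI_spec S hS
  refine fmaxI_unique _ _ ?_ ?_
  · rcases le_total v (fmaxI S) with h | h
    · rw [max_eq_left h]; exact Finset.mem_insert_of_mem hmem
    · rw [max_eq_right h]; exact Finset.mem_insert_self _ _
  · intro w hw
    rcases Finset.mem_insert.mp hw with rfl | hw
    · exact le_max_right _ _
    · exact le_trans (hle w hw) (le_max_left _ _)

theorem pvIdx_inj (land : List (List Int)) (p q : Nat × Nat) (hp : p ∈ pvCells land)
    (hq : q ∈ pvCells land) (h : pvIdx land p = pvIdx land q) : p = q := by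
  rw [← pvCellF_idx land p hp, ← pvCellF_idx land q hq, h]

theorem pvMem_repsUpTo (land : List (List Int)) (t : Nat) (p : Nat × Nat) :
    p ∈ pvRepsUpTo land t ↔ pvRepB land p = true ∧ pvIdx land p < t := by
  simp only [pvRepsUpTo, List.mem_filter, List.mem_map, List.mem_range]
  constructor
  · rintro ⟨⟨i, hi, rfl⟩, hrep⟩
    exact ⟨hrep, by rw [pvIdx_cellF]; exact hi⟩
  · rintro ⟨hrep, hlt⟩
    have hok : pvOkB land p = true := by
      simp only [pvRepB, Bool.and_eq_true] at hrep
      exact hrep.1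
    have hpc : p ∈ pvCells land := pvMem_cells_of_ok land p hok
    exact ⟨⟨pvIdx land p, hlt, pvCellF_idx land p hpc⟩, hrep⟩

theorem pvRepsUpTo_succ (land : List (List Int)) (t : Nat) :
    pvRepsUpTo land (t + 1) = pvRepsUpTo land t ++
      (if pvRepB land (pvCellF land t) = true then [pvCellF land t] else []) := by
  simp only [pvRepsUpTo, List.range_succ, List.map_append, List.filter_append,
    List.map_cons, List.map_nil]
  congr 1
  rcases h : pvRepB land (pvCellF land t) with _ | _ <;> simp [List.filter, h]

theorem pvRepsUpTo_map_idx (land : List (List Int)) (t : Nat) :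
    (pvRepsUpTo land t).map (pvIdx land) =
      (List.range t).filter (fun i => pvRepB land (pvCellF land i)) := by
  induction t with
  | zero => simp [pvRepsUpTo]
  | succ t ih =>
    rw [pvRepsUpTo_succ, List.map_append, ih, List.range_succ, List.filter_append]
    congr 1
    rcases h : pvRepB land (pvCellF land t) with _ | _ <;>
      simp [List.filter, h, pvIdx_cellF]

theorem pvReps_keys_nodup (land : List (List Int)) (t : Nat) :
    ((pvRepsUpTo land t).map (fun p => (pvIdx land p : Int))).Nodup := by
  have h1 : (pvRepsUpTo land t).map (fun p => (pvIdx land p : Int)) =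
      ((pvRepsUpTo land t).map (pvIdx land)).map (fun i : Nat => (i : Int)) := by
    rw [List.map_map]
    rfl
  rw [h1, pvRepsUpTo_map_idx]
  exact ((List.nodup_range).filter _).map (fun a b => by exact_mod_cast id)

theorem pvRep_min (land : List (List Int)) (p : Nat × Nat) (h : pvRepB land p = true) :
    pvOkB land p = true ∧ ∀ q ∈ pvComp land p, pvIdx land p ≤ pvIdx land q := by
  simp only [pvRepB, Bool.and_eq_true, decide_eq_true_eq] at h
  exact h

theorem pvRep_unique (land : List (List Int)) (p q : Nat × Nat) (hp : pvRepB land p = true)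
    (hq : pvRepB land q = true) (hc : pvComp land p = pvComp land q) : p = q := by
  obtain ⟨hpok, hpmin⟩ := pvRep_min land p hp
  obtain ⟨hqok, hqmin⟩ := pvRep_min land q hq
  have hpc := pvMem_cells_of_ok land p hpok
  have hqc := pvMem_cells_of_ok land q hqok
  have h1 : pvIdx land p ≤ pvIdx land q := hpmin q (by rw [hc]; exact pvMem_comp_self land q)
  have h2 : pvIdx land q ≤ pvIdx land p := hqmin p (by rw [← hc]; exact pvMem_comp_self land p)
  exact pvIdx_inj land p q hpc hqc (by omega)

theorem pvLab_rep (land : List (List Int)) (i : Nat) (hi : i < pvNM land)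
    (hok : pvOkB land (pvCellF land i) = true) :
    ∃ r0, pvRepB land r0 = true ∧ r0 ∈ pvComp land (pvCellF land i) ∧
      pvComp land r0 = pvComp land (pvCellF land i) ∧
      (pvLabF land).getD i 0 = (pvIdx land r0 : Int) ∧
      ∀ q ∈ pvComp land (pvCellF land i), pvIdx land r0 ≤ pvIdx land q := by
  have hc := pvCellF_mem_cells land i hi
  obtain ⟨-, hchar⟩ := pvLabF_inv land
  obtain ⟨hub, q0, hq0, hq0e⟩ := (hchar i hi).1 hok
  rw [pvBall_eq_comp land _ hc (le_refl _)] at hq0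
  have hcompeq : pvComp land q0 = pvComp land (pvCellF land i) :=
    pvComp_eq_of_mem land _ q0 hc hq0
  have hq0ok : pvOkB land q0 = true := pvOk_of_mem_comp land _ hok q0 hq0
  have hmin : ∀ q ∈ pvComp land (pvCellF land i), pvIdx land q0 ≤ pvIdx land q := by
    intro q hq
    have := hub q (by rwa [pvBall_eq_comp land _ hc (le_refl _)])
    rw [hq0e] at this
    exact_mod_cast this
  refine ⟨q0, ?_, hq0, hcompeq, hq0e, hmin⟩
  simp only [pvRepB, hq0ok, Bool.true_and, decide_eq_true_eq]
  intro q hq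
  rw [hcompeq] at hq
  exact hmin q hq

theorem pvPart_NM (land : List (List Int)) (p : Nat × Nat) (hp : p ∈ pvCells land) :
    pvPart land p (pvNM land) = pvComp land p := by
  rw [pvPart, Finset.filter_true_of_mem]
  intro q hq
  exact pvIdx_lt_NM land q (pvBall_subset_cells land p hp _ hq)

theorem pvPart_succ_skip (land : List (List Int)) (p : Nat × Nat) (hp : p ∈ pvCells land)
    (t : Nat) (hno : pvCellF land t ∉ pvComp land p) :
    pvPart land p (t + 1) = pvPart land p t := by
  simp only [pvPart]
  apply Finset.filter_congr
  intro q hq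
  have hqc : q ∈ pvCells land := pvBall_subset_cells land p hp _ hq
  constructor
  · intro hlt
    rcases Nat.lt_succ_iff_lt_or_eq.mp hlt with h | h
    · exact h
    · exfalso
      have : q = pvCellF land t := by rw [← pvCellF_idx land q hqc, h]
      rw [this] at hq
      exact hno hq
  · omega

theorem pvPart_succ_insert (land : List (List Int)) (p : Nat × Nat) (hp : p ∈ pvCells land)
    (t : Nat) (hmem : pvCellF land t ∈ pvComp land p) :
    pvPart land p (t + 1) = insert (pvCellF land t) (pvPart land p t) := by
  ext q
  simp only [pvPart, Finset.mem_insert, Finset.mem_filter]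
  constructor
  · rintro ⟨hqm, hlt⟩
    have hqc : q ∈ pvCells land := pvBall_subset_cells land p hp _ hqm
    rcases Nat.lt_succ_iff_lt_or_eq.mp hlt with h | h
    · exact Or.inr ⟨hqm, h⟩
    · exact Or.inl (by rw [← pvCellF_idx land q hqc, h])
  · rintro (rfl | ⟨hqm, hlt⟩)
    · exact ⟨hmem, by rw [pvIdx_cellF]; omega⟩
    · exact ⟨hqm, by omega⟩

theorem pvAgg_items (land : List (List Int)) :
    ∀ (k t : Nat), t + k = pvNM land →
    ∀ agg : PySem.Dict Int (Int × Int × Int),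
      agg.items = (pvRepsUpTo land t).map (pvEntry land t) →
      (((List.range' t k).map (fun j : Nat => (j : Int))).foldl
        (pvAggF land (pvLabF land)) agg).items =
        (pvReps land).map (pvEntry land (pvNM land)) := by
  intro k
  induction k with
  | zero =>
    intro t ht agg hagg
    simp only [List.range', List.map_nil, List.foldl_nil]
    rw [hagg]
    have : t = pvNM land := by omega
    subst this
    rfl
  | succ k ih =>
    intro t ht agg hagg
    have hti : t < pvNM land := by omega
    have hc := pvCellF_mem_cells land t hti
    rw [List.range'_succ, List.map_cons, List.foldl_cons]
    have hkeys : agg.keys = (pvRepsUpTo land t).map (fun p => (pvIdx land p : Int)) := by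
      show agg.items.map (·.1) = _
      rw [hagg, List.map_map]
      rfl
    have hkeysnd : agg.keys.Nodup := by
      rw [hkeys]
      exact pvReps_keys_nodup land t
    by_cases hok : pvOkB land (pvCellF land t) = true
    · obtain ⟨r0, hr0rep, hr0mem, hr0comp, hr0lab, hr0min⟩ := pvLab_rep land t hti hok
      have hr0ok := (pvRep_min land r0 hr0rep).1
      have hr0c : r0 ∈ pvCells land := pvMem_cells_of_ok land r0 hr0ok
      have hstep : pvAggF land (pvLabF land) agg (t : Int) =
          match PySem.Dict.get? agg ((pvIdx land r0 : Int)) with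
          | some (c, mn, mx) => PySem.Dict.insert agg ((pvIdx land r0 : Int))
              (c + 1, min mn ((pvCellF land t).2 : Int), max mx ((pvCellF land t).2 : Int))
          | none => PySem.Dict.insert agg ((pvIdx land r0 : Int))
              (1, ((pvCellF land t).2 : Int), ((pvCellF land t).2 : Int)) := by
        show (if (PySem.List.pyGetD (pvLabF land) ((t : Nat) : Int) 0) < 0 then agg else _) = _
        rw [PySem.List.pyGetD_natCast]
        rw [show (pvLabF land).getD t 0 = (pvIdx land r0 : Int) from hr0lab]
        rw [if_neg (by omega)]
        have hy : PySem.Int.mod ((t : Nat) : Int) ((pvM land : Nat) : Int) =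
            ((pvCellF land t).2 : Int) := by
          rw [PySem.Int.mod_natCast]
          rfl
        rw [hy]
      have hidxr0 : pvIdx land r0 ≤ t := by
        have := hr0min (pvCellF land t) (pvMem_comp_self land _)
        rwa [pvIdx_cellF] at this
      rcases Nat.lt_or_ge (pvIdx land r0) t with hlt | hge
      · -- the component already has an entry, keyed by its representative
        have hr0in : r0 ∈ pvRepsUpTo land t := (pvMem_repsUpTo land t r0).mpr ⟨hr0rep, hlt⟩
        have hmemit : ((pvIdx land r0 : Int), (pvEntry land t r0).2) ∈ agg.items := by
          rw [hagg]
          exact List.mem_map.mpr ⟨r0, hr0in, rfl⟩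
        have hget : PySem.Dict.get? agg ((pvIdx land r0 : Int)) =
            some (pvEntry land t r0).2 :=
          PySem.Dict.get?_of_mem_items agg hmemit hkeysnd
        have hcont : agg.contains ((pvIdx land r0 : Int)) = true := by
          rw [PySem.Dict.contains_eq_isSome_get?, hget]
          rfl
        rw [hstep, hget]
        have hrepc : pvRepB land (pvCellF land t) = false := by
          rcases hres : pvRepB land (pvCellF land t) with _ | _
          · rfl
          · exfalso
            have := pvRep_unique land (pvCellF land t) r0 hres hr0rep hr0comp.symm
            rw [← this] at hlt
            rw [pvIdx_cellF] at hlt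
            omega
        have hreps : pvRepsUpTo land (t + 1) = pvRepsUpTo land t := by
          rw [pvRepsUpTo_succ, hrepc]
          simp
        apply ih (t + 1) (by omega)
        rw [PySem.Dict.items_insert_of_contains agg _ hcont, hagg, List.map_map, hreps]
        apply List.map_congr_left
        intro p hp
        obtain ⟨hprep, hplt⟩ := (pvMem_repsUpTo land t p).mp hp
        have hpok := (pvRep_min land p hprep).1
        have hpc := pvMem_cells_of_ok land p hpok
        by_cases hpe : p = r0
        · subst hpe
          simp only [Function.comp_apply, pvEntry, beq_self_eq_true, if_pos]
          have hcm : pvCellF land t ∈ pvComp land p := by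
            rw [hr0comp]
            exact pvMem_comp_self land _
          have hins := pvPart_succ_insert land p hpc t hcm
          have hnotin : pvCellF land t ∉ pvPart land p t := by
            simp only [pvPart, Finset.mem_filter]
            rintro ⟨-, hlt'⟩
            rw [pvIdx_cellF] at hlt'
            omega
          have hnem : (pvColsI (pvPart land p t)).Nonempty := by
            refine ⟨(p.2 : Int), Finset.mem_image.mpr ⟨p, ?_, rfl⟩⟩
            simp only [pvPart, Finset.mem_filter]
            exact ⟨pvMem_comp_self land p, hlt⟩
          rw [hins]
          have hcols : pvColsI (insert (pvCellF land t) (pvPart land p t)) =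
              insert ((pvCellF land t).2 : Int) (pvColsI (pvPart land p t)) :=
            Finset.image_insert _ _ _
          rw [Finset.card_insert_of_notMem hnotin, hcols,
            fminI_insert _ hnem, fmaxI_insert _ hnem]
          have : ((pvPart land p t).card + 1 : Nat) = ((pvPart land p t).card : Int) + 1 := by
            push_cast; ring
          rw [this]
        · have hne : ((pvIdx land p : Int) == (pvIdx land r0 : Int)) = false := by
            simp only [beq_eq_false_iff_ne, ne_eq, Int.natCast_inj]
            intro he
            exact hpe (pvIdx_inj land p r0 hpc hr0c he)
          simp only [Function.comp_apply, pvEntry, hne]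
          simp only [Bool.false_eq_true, if_false]
          have hskip : pvCellF land t ∉ pvComp land p := by
            intro hmem
            have h1 : pvComp land (pvCellF land t) = pvComp land p :=
              pvComp_eq_of_mem land p _ hpc hmem
            exact hpe (pvRep_unique land p r0 hprep hr0rep (by rw [← h1, hr0comp]))
          rw [pvPart_succ_skip land p hpc t hskip]
      · -- this cell opens a new component entry
        have hteq : pvIdx land r0 = t := by omega
        have hr0eq : r0 = pvCellF land t := by
          rw [← pvCellF_idx land r0 hr0c, hteq]
        have hget : PySem.Dict.get? agg ((pvIdx land r0 : Int)) = none := by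
          rw [PySem.Dict.get?_eq_none_iff_not_mem_keys agg _, hkeys]
          intro hmem
          obtain ⟨p, hp, hpe⟩ := List.mem_map.mp hmem
          obtain ⟨-, hplt⟩ := (pvMem_repsUpTo land t p).mp hp
          have : pvIdx land p = pvIdx land r0 := by exact_mod_cast hpe
          omega
        have hcont : agg.contains ((pvIdx land r0 : Int)) = false := by
          rw [PySem.Dict.contains_eq_isSome_get?, hget]
          rfl
        rw [hstep, hget]
        have hrepc : pvRepB land (pvCellF land t) = true := by
          rw [← hr0eq]
          exact hr0rep
        have hreps : pvRepsUpTo land (t + 1) =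
            pvRepsUpTo land t ++ [pvCellF land t] := by
          rw [pvRepsUpTo_succ, hrepc]
          simp
        apply ih (t + 1) (by omega)
        rw [PySem.Dict.items_insert_of_not_contains agg _ hcont, hagg, hreps,
          List.map_append]
        congr 1
        · apply List.map_congr_left
          intro p hp
          obtain ⟨hprep, hplt⟩ := (pvMem_repsUpTo land t p).mp hp
          have hpok := (pvRep_min land p hprep).1
          have hpc := pvMem_cells_of_ok land p hpok
          have hskip : pvCellF land t ∉ pvComp land p := by
            intro hmem
            have h1 : pvComp land (pvCellF land t) = pvComp land p :=
              pvComp_eq_of_mem land p _ hpc hmem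
            have : p = r0 := pvRep_unique land p r0 hprep hr0rep (by rw [← h1, hr0comp])
            rw [this] at hplt
            omega
          simp only [pvEntry]
          rw [pvPart_succ_skip land p hpc t hskip]
        · simp only [List.map_cons, List.map_nil, pvEntry]
          have hpart : pvPart land (pvCellF land t) (t + 1) = {pvCellF land t} := by
            ext q
            simp only [pvPart, Finset.mem_filter, Finset.mem_singleton]
            constructor
            · rintro ⟨hqm, hqlt⟩
              have hqc : q ∈ pvCells land := pvBall_subset_cells land _ hc _ hqm
              have := hr0min q hqm
              rw [hteq] at this
              have hqe : pvIdx land q = t := by omega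
              rw [← pvCellF_idx land q hqc, hqe]
            · rintro rfl
              exact ⟨pvMem_comp_self land _, by rw [pvIdx_cellF]; omega⟩
          rw [hpart]
          have hcols : pvColsI ({pvCellF land t} : Finset (Nat × Nat)) =
              {((pvCellF land t).2 : Int)} := by
            simp [pvColsI]
          rw [hcols, fminI_singleton, fmaxI_singleton]
          rw [← hr0eq, hteq]
          simp
    · -- empty cell: labels are -1, the dict is untouched
      have hm1 : (pvLabF land).getD t 0 = -1 :=
        ((pvLabF_inv land).2 t hti).2 (Bool.of_not_eq_true hok)
      have hstep : pvAggF land (pvLabF land) agg (t : Int) = agg := by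
        show (if (PySem.List.pyGetD (pvLabF land) ((t : Nat) : Int) 0) < 0 then agg else _) = _
        rw [PySem.List.pyGetD_natCast, hm1]
        rw [if_pos (by omega)]
      rw [hstep]
      have hrepc : pvRepB land (pvCellF land t) = false :=
        pvRep_false_nok land _ (Bool.of_not_eq_true hok)
      have hreps : pvRepsUpTo land (t + 1) = pvRepsUpTo land t := by
        rw [pvRepsUpTo_succ, hrepc]
        simp
      apply ih (t + 1) (by omega)
      rw [hagg, hreps]
      apply List.map_congr_left
      intro p hp
      obtain ⟨hprep, hplt⟩ := (pvMem_repsUpTo land t p).mp hp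
      have hpok := (pvRep_min land p hprep).1
      have hpc := pvMem_cells_of_ok land p hpok
      have hskip : pvCellF land t ∉ pvComp land p := by
        intro hmem
        exact hok (pvOk_of_mem_comp land p hpok _ hmem)
      simp only [pvEntry]
      rw [pvPart_succ_skip land p hpc t hskip]

theorem pvFoldlConst {α β : Type} (l : List β) (F : α → α) (a : α) :
    l.foldl (fun x _ => F x) a = F^[l.length] a := by
  induction l generalizing a with
  | nil => rfl
  | cons b l ih =>
    rw [List.foldl_cons, ih, List.length_cons, Function.iterate_succ_apply]

theorem pvB_eq (land : List (List Int)) (hpre : Pre_solution land) :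
    solution_alt land = pvResult land := by
  obtain ⟨hne, hmpos, hrows⟩ := hpre
  have hget0 : PySem.List.pyGetD land 0 [] = land.headD [] := by
    rcases land with _ | ⟨r0, rest⟩
    · simp at hne
    · simp
  have h0 : solution_alt land =
      (PySem.List.max?
        ((PySem.Dict.values
          ((PySem.List.pyRange 0 ((pvN land : Int) * (pvM land : Int)) 1).foldl
            (pvAggF land
              ((PySem.List.pyRange 0 ((pvN land : Int) * (pvM land : Int)) 1).foldl
                (fun lab _ => pvSweepF land lab) (pvLab0 land)))
            PySem.Dict.empty)).foldl
          (fun oil t => pvAddRange oil t.2.1 t.2.2 t.1) (pvOil0 land))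
        (fun v => v)).getD 0 := by
    simp only [solution_alt, PySem.List.len_eq, hget0]
    rfl
  have hlen : (PySem.List.pyRange 0 ((pvN land : Int) * (pvM land : Int)) 1).length =
      pvNM land := by
    rw [← Nat.cast_mul, PySem.List.length_pyRange_one, Int.sub_zero, Int.toNat_natCast]
    rfl
  have hlab : (PySem.List.pyRange 0 ((pvN land : Int) * (pvM land : Int)) 1).foldl
      (fun lab _ => pvSweepF land lab) (pvLab0 land) = pvLabF land := by
    rw [pvFoldlConst, hlen]
    rfl
  rw [hlab] at h0
  have hagg : ((PySem.List.pyRange 0 ((pvN land : Int) * (pvM land : Int)) 1).foldl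
      (pvAggF land (pvLabF land)) PySem.Dict.empty).items =
      (pvReps land).map (pvEntry land (pvNM land)) := by
    rw [← Nat.cast_mul, pvPyRangeNat, List.range_eq_range']
    exact pvAgg_items land (pvNM land) 0 (Nat.zero_add _) PySem.Dict.empty
      (by simp [pvRepsUpTo, PySem.Dict.empty])
  have hvals : PySem.Dict.values
      ((PySem.List.pyRange 0 ((pvN land : Int) * (pvM land : Int)) 1).foldl
        (pvAggF land (pvLabF land)) PySem.Dict.empty) =
      (pvReps land).map (fun p => ((pvCnt land p), (pvMnCol land p), (pvMxCol land p))) := by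
    show (((PySem.List.pyRange 0 ((pvN land : Int) * (pvM land : Int)) 1).foldl
        (pvAggF land (pvLabF land)) PySem.Dict.empty).items).map (·.2) = _
    rw [hagg, List.map_map]
    apply List.map_congr_left
    intro p hp
    obtain ⟨hprep, -⟩ := (pvMem_repsUpTo land _ p).mp hp
    have hpc := pvMem_cells_of_ok land p (pvRep_min land p hprep).1
    simp only [Function.comp_apply, pvEntry, pvPart_NM land p hpc]
    rfl
  rw [hvals, List.foldl_map] at h0
  rw [h0]
  rfl

-- ---------- the equivalence ----------

theorem pvAB_eq (land : List (List Int)) (hpre : Pre_solution land) :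
    solution land = solution_alt land := by
  rw [pvA_eq land hpre, pvB_eq land hpre]

-- ===== VERDICT (by name: the statement is the Claim_ definition above) =====
theorem solution_spec : Claim_equal_solution := by
  intro land _ hpre
  unfold Spec_solution
  exact pvAB_eq land hpre
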